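-- pv_equiv track=rewrite | github.com/Adam-Hoelscher/CodeFights.py | citiesConquering.py | citiesConquering
-- ===== SOURCE A (Python) =====
-- def citiesConquering(n, roads):
--
--     ans = [-1 for _ in range(n)]
--
--     free = {k: set() for k in range(n)}
--     for a, b in roads:
--         free[a].add(b)
--         free[b].add(a)
--
--     day = 0
--     conquered = set([None])
--
--     while conquered:
--
--         day += 1
--         next_conq = set()
--
--         for city, neighbors in free.items():
--             free[city] -= conquered
--             if len(neighbors) <= 1:
--                 next_conq.add(city)
--                 ans[city] = day
--
--         for city in next_conq:
--             free.pop(city, None)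
--
--         conquered = next_conq
--
--     return ans
-- ===== SOURCE B (Python) =====
-- def citiesConquering(n, roads):
--     # BFS leaf-peeling: fixed adjacency lists + integer degree counters + a frontier queue.
--     adj = [[] for _ in range(n)]
--     seen = set()
--     for a, b in roads:
--         if (a, b) not in seen:
--             seen.add((a, b))
--             seen.add((b, a))
--             adj[a].append(b)
--             if b != a:
--                 adj[b].append(a)
--     deg = [len(l) for l in adj]
--     ans = [-1] * n
--     frontier = [c for c in range(n) if deg[c] <= 1]
--     day = 1
--     for c in frontier:
--         ans[c] = day
--     while frontier:
--         day += 1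
--         nxt = []
--         for c in frontier:
--             for v in adj[c]:
--                 if ans[v] == -1:
--                     deg[v] -= 1
--                     if deg[v] <= 1:
--                         ans[v] = day
--                         nxt.append(v)
--         frontier = nxt
--     return ans
-- ===== Notes on version B (the rewrite author's own statement) =====
-- stated objective: faster
-- what changed: A rescans every remaining city each round, maintaining a dict of shrinking neighbour sets and subtracting the previously conquered set; B builds fixed adjacency lists once and peels leaves by BFS: integer degree counters are decremented only along edges leaving the current frontier, so each edge is touched O(1) times.
import Mathlib
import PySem

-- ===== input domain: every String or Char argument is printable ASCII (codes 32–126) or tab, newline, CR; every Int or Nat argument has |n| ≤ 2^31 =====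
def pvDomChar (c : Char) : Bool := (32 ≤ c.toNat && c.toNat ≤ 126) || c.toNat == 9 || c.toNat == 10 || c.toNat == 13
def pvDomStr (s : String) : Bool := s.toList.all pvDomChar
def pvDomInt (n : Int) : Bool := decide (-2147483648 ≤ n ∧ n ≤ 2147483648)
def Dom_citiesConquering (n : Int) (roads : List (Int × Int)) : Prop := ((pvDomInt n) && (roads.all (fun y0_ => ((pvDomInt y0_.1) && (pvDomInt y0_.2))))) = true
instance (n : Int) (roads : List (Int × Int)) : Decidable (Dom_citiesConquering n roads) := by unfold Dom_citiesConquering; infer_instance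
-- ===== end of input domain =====

-- B replaces A's per-round rescan of a dict of shrinking neighbour sets by one-time adjacency
-- lists, integer degree counters and a frontier queue (BFS leaf peeling) — objective: faster.

-- ===== PORT A =====
-- free = {k: set() for k in range(n)}; for a, b in roads: free[a].add(b); free[b].add(a)
-- (`free[a]` on a missing key raises KeyError — those inputs are excluded by Pre_; Dict.modify
--  is exact when the key is present).
def pvAinit (n : Int) (roads : List (Int × Int)) : PySem.Dict Int (PySem.Set Int) :=
  roads.foldl
    (fun d p =>
      (d.modify p.1 PySem.Set.empty (fun s => PySem.Set.add s p.2)).modify p.2 PySem.Set.empty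
        (fun s => PySem.Set.add s p.1))
    ((PySem.List.pyRange 0 n 1).foldl (fun d k => d.insert k PySem.Set.empty) PySem.Dict.empty)

-- one item of the round: free[city] -= conquered; if len(...) <= 1: next_conq.add(city); ans[city] = day
-- (the in-place difference against the mixed-type set `conquered` is ported element-wise — exact as sets;
--  ans[city] with city a key of free is a valid non-negative index).
def pvAstep (conq : PySem.Set (Option Int)) (day : Int)
    (st : PySem.Dict Int (PySem.Set Int) × List Int × PySem.Set Int) (p : Int × PySem.Set Int) :
    PySem.Dict Int (PySem.Set Int) × List Int × PySem.Set Int :=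
  if PySem.Set.len (p.2.filter (fun x => !(PySem.Set.contains conq (some x)))) ≤ 1 then
    (st.1.insert p.1 (p.2.filter (fun x => !(PySem.Set.contains conq (some x)))),
     PySem.List.pySetD st.2.1 p.1 day, PySem.Set.add st.2.2 p.1)
  else (st.1.insert p.1 (p.2.filter (fun x => !(PySem.Set.contains conq (some x)))), st.2.1, st.2.2)

-- while conquered: … — fuel n.toNat+2 only makes the loop structurally recursive; it is never
-- exhausted (each round but the last pops ≥ 1 of the n keys, proved in the lemmas below).
-- Python iterates over the live dict view mutating only values in place: folding over the
-- snapshot of items is exact.  The pops and the ans-writes iterate over the set next_conq,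
-- whose Python iteration order is not modelled; both are order-independent (distinct keys).
def pvAloop (fuel : Nat) (free : PySem.Dict Int (PySem.Set Int)) (conq : PySem.Set (Option Int))
    (ans : List Int) (day : Int) : List Int :=
  match fuel with
  | 0 => ans
  | fuel + 1 =>
    if conq = [] then ans
    else
      let st := free.items.foldl (pvAstep conq (day + 1)) (free, ans, PySem.Set.empty)
      let fr := st.2.2.foldl (fun d c => d.erase c) st.1
      pvAloop fuel fr (st.2.2.map (fun c => some c)) st.2.1 (day + 1)

def citiesConquering (n : Int) (roads : List (Int × Int)) : List Int :=
  pvAloop (n.toNat + 2) (pvAinit n roads) (PySem.Set.ofList [none])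
    ((PySem.List.pyRange 0 n 1).map (fun _ => (-1 : Int))) 0

-- ===== PORT B =====
-- adj = [[] for _ in range(n)]; seen = set(); for a, b in roads: … (dedup of undirected pairs).
-- Python list indexing adj[a] raises IndexError out of range (excluded by Pre_); pySetD/pyGetD
-- are exact for the in-range indices Pre_ admits.
-- adj[x].append(y)
def pvBadd (adj : List (List Int)) (x y : Int) : List (List Int) :=
  PySem.List.pySetD adj x (PySem.List.pyGetD adj x [] ++ [y])

def pvBbuild (n : Int) (roads : List (Int × Int)) : List (List Int) × PySem.Set (Int × Int) :=
  roads.foldl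
    (fun st p =>
      if PySem.Set.contains st.2 p then st
      else
        (if p.2 ≠ p.1 then pvBadd (pvBadd st.1 p.1 p.2) p.2 p.1 else pvBadd st.1 p.1 p.2,
         PySem.Set.add (PySem.Set.add st.2 p) (p.2, p.1)))
    ((PySem.List.pyRange 0 n 1).map (fun _ => ([] : List Int)), PySem.Set.empty)

-- body of `for v in adj[c]:` — if ans[v] == -1: deg[v] -= 1; if deg[v] <= 1: ans[v] = day; nxt.append(v)
def pvBstep (day : Int) (st : List Int × List Int × List Int) (v : Int) :
    List Int × List Int × List Int :=
  if PySem.List.pyGetD st.2.1 v 0 = -1 then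
    if PySem.List.pyGetD (PySem.List.pySetD st.1 v (PySem.List.pyGetD st.1 v 0 - 1)) v 0 ≤ 1 then
      (PySem.List.pySetD st.1 v (PySem.List.pyGetD st.1 v 0 - 1),
       PySem.List.pySetD st.2.1 v day, st.2.2 ++ [v])
    else (PySem.List.pySetD st.1 v (PySem.List.pyGetD st.1 v 0 - 1), st.2.1, st.2.2)
  else st

-- while frontier: … — fuel n.toNat+2 only makes the loop structurally recursive; it is never
-- exhausted (the nonempty frontiers are disjoint subsets of the n cities).
def pvBloop (fuel : Nat) (adj : List (List Int)) (deg ans frontier : List Int) (day : Int) :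
    List Int :=
  match fuel with
  | 0 => ans
  | fuel + 1 =>
    if frontier = [] then ans
    else
      let st := frontier.foldl
        (fun st c => (PySem.List.pyGetD adj c []).foldl (pvBstep (day + 1)) st) (deg, ans, [])
      pvBloop fuel adj st.1 st.2.1 st.2.2 (day + 1)

def citiesConquering_alt (n : Int) (roads : List (Int × Int)) : List Int :=
  let adj := (pvBbuild n roads).1
  let deg := adj.map (fun l => (l.length : Int))
  let ans0 := List.replicate n.toNat (-1 : Int)          -- [-1] * n
  let frontier := (PySem.List.pyRange 0 n 1).filter (fun c => PySem.List.pyGetD deg c 0 ≤ 1)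
  let ans1 := frontier.foldl (fun a c => PySem.List.pySetD a c 1) ans0
  pvBloop (n.toNat + 2) adj deg ans1 frontier 1

-- ===== PRECONDITION & SPEC =====
-- Pre_ excludes exactly the inputs on which A raises: a road endpoint outside range(n)
-- is a KeyError in A's `free[a].add(b)`.
def Pre_citiesConquering (n : Int) (roads : List (Int × Int)) : Prop :=
  ∀ p ∈ roads, (0 ≤ p.1 ∧ p.1 < n) ∧ (0 ≤ p.2 ∧ p.2 < n)
instance (n : Int) (roads : List (Int × Int)) : Decidable (Pre_citiesConquering n roads) := by
  unfold Pre_citiesConquering; infer_instance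

def pvWitness_citiesConquering : Int × (List (Int × Int)) := (5, [(0, 1), (1, 2), (2, 3), (3, 1), (1, 4)])

def Spec_citiesConquering (n : Int) (roads : List (Int × Int)) (out : List Int) : Prop := out = citiesConquering_alt n roads
instance (n : Int) (roads : List (Int × Int)) (out : List Int) : Decidable (Spec_citiesConquering n roads out) := by unfold Spec_citiesConquering; infer_instance

-- ===== CLAIM (what is proved, stated in full; the proofs are below) =====
def Claim_equal_citiesConquering : Prop := ∀ (n : Int) (roads : List (Int × Int)), Dom_citiesConquering n roads → Pre_citiesConquering n roads → Spec_citiesConquering n roads (citiesConquering n roads)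

-- ===== LEMMAS AND PROOFS =====

-- ---- abstract peeling spec ----
def pvAdjS (roads : List (Int × Int)) (c v : Int) : Bool :=
  roads.any (fun p => (p.1 == c && p.2 == v) || (p.1 == v && p.2 == c))

def pvAlive (n : Int) (roads : List (Int × Int)) : Nat → Int → Bool
  | 0, c => decide (0 ≤ c ∧ c < n)
  | d + 1, c => pvAlive n roads d c &&
      decide (2 ≤ ((PySem.List.pyRange 0 n 1).filter
        (fun v => pvAlive n roads d v && pvAdjS roads c v)).length)

def pvDeg (n : Int) (roads : List (Int × Int)) (d : Nat) (c : Int) : Nat :=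
  ((PySem.List.pyRange 0 n 1).filter (fun v => pvAlive n roads d v && pvAdjS roads c v)).length

def pvR (n : Int) (roads : List (Int × Int)) (d : Nat) : List Int :=
  (PySem.List.pyRange 0 n 1).filter
    (fun c => pvAlive n roads d c && !(pvAlive n roads (d + 1) c))

def pvAns (n : Int) (roads : List (Int × Int)) (D : Nat) (c : Int) : Int :=
  match (List.range (D + 1)).find? (fun e => !(pvAlive n roads e c)) with
  | some e => (e : Int)
  | none => -1

theorem pvAlive_succ (n : Int) (roads : List (Int × Int)) (d : Nat) (c : Int) :
    pvAlive n roads (d + 1) c = (pvAlive n roads d c && decide (2 ≤ pvDeg n roads d c)) := rfl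

theorem pvAlive_zero (n : Int) (roads : List (Int × Int)) (c : Int) :
    pvAlive n roads 0 c = decide (0 ≤ c ∧ c < n) := rfl

theorem pvAlive_mono (n : Int) (roads : List (Int × Int)) (d : Nat) (c : Int)
    (h : pvAlive n roads (d + 1) c = true) : pvAlive n roads d c = true := by
  rw [pvAlive_succ] at h; exact (Bool.and_eq_true_iff.mp h).1

theorem pvAlive_add (n : Int) (roads : List (Int × Int)) (d k : Nat) (c : Int)
    (h : pvAlive n roads (d + k) c = true) : pvAlive n roads d c = true := by
  induction k with
  | zero => exact h
  | succ k ih => exact ih (pvAlive_mono n roads (d + k) c (by rwa [Nat.add_succ] at h))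

theorem pvAlive_le (n : Int) (roads : List (Int × Int)) {d e : Nat} (hde : d ≤ e) (c : Int)
    (h : pvAlive n roads e c = true) : pvAlive n roads d c = true := by
  obtain ⟨k, rfl⟩ := Nat.exists_eq_add_of_le hde
  exact pvAlive_add n roads d k c h

theorem pvAlive_range (n : Int) (roads : List (Int × Int)) (d : Nat) (c : Int)
    (h : pvAlive n roads d c = true) : 0 ≤ c ∧ c < n := by
  have h0 := pvAlive_le n roads (Nat.zero_le d) c h
  rw [pvAlive_zero] at h0; exact of_decide_eq_true h0

theorem pvAdjS_symm (roads : List (Int × Int)) (c v : Int) :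
    pvAdjS roads c v = pvAdjS roads v c := by
  unfold pvAdjS
  induction roads with
  | nil => rfl
  | cons p ps ih =>
    simp only [List.any_cons, ih]
    cases h1 : (p.1 == c && p.2 == v) <;> cases h2 : (p.1 == v && p.2 == c) <;> simp [h1, h2]

theorem mem_pvR (n : Int) (roads : List (Int × Int)) (d : Nat) (x : Int) :
    x ∈ pvR n roads d ↔ (pvAlive n roads d x = true ∧ ¬ pvAlive n roads (d + 1) x = true) := by
  unfold pvR
  rw [List.mem_filter]
  constructor
  · rintro ⟨-, h⟩; simpa using h
  · rintro ⟨h1, h2⟩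
    refine ⟨?_, by simpa using And.intro h1 h2⟩
    rw [PySem.List.mem_pyRange_one]
    exact pvAlive_range n roads d x h1

theorem nodup_pvR (n : Int) (roads : List (Int × Int)) (d : Nat) : (pvR n roads d).Nodup :=
  (PySem.List.nodup_pyRange_one 0 n).filter _

-- length of two nodup lists with the same members
theorem pvLenEq {α : Type} {l₁ l₂ : List α} (h1 : l₁.Nodup) (h2 : l₂.Nodup)
    (h : ∀ x, x ∈ l₁ ↔ x ∈ l₂) : l₁.length = l₂.length :=
  ((List.perm_ext_iff_of_nodup h1 h2).mpr h).length_eq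

theorem pvDeg_eq_of_set (n : Int) (roads : List (Int × Int)) (d : Nat) (c : Int)
    {s : List Int} (hs : s.Nodup)
    (hm : ∀ v, v ∈ s ↔ (pvAdjS roads c v = true ∧ pvAlive n roads d v = true)) :
    s.length = pvDeg n roads d c := by
  refine pvLenEq hs ((PySem.List.nodup_pyRange_one 0 n).filter _) ?_
  intro v
  rw [hm, List.mem_filter, PySem.List.mem_pyRange_one]
  constructor
  · rintro ⟨h1, h2⟩; exact ⟨pvAlive_range n roads d v h2, by simp [h1, h2]⟩
  · rintro ⟨-, h⟩
    have := Bool.and_eq_true_iff.mp h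
    exact ⟨this.2, this.1⟩

-- generic countP split
theorem pvCountPSplit {α : Type} (l : List α) (p q : α → Bool) :
    l.countP p = l.countP (fun a => p a && q a) + l.countP (fun a => p a && !q a) := by
  induction l with
  | nil => rfl
  | cons a l ih =>
    by_cases hp : p a = true <;> by_cases hq : q a = true <;>
      simp [List.countP_cons, hp, hq, ih] <;> omega

theorem pvDeg_split (n : Int) (roads : List (Int × Int)) (d : Nat) (v : Int) :
    pvDeg n roads d v =
      pvDeg n roads (d + 1) v + (pvR n roads d).countP (fun u => pvAdjS roads v u) := by
  unfold pvDeg pvR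
  rw [List.countP_filter, ← List.countP_eq_length_filter, ← List.countP_eq_length_filter]
  rw [pvCountPSplit (PySem.List.pyRange 0 n 1)
      (fun a => pvAlive n roads d a && pvAdjS roads v a) (fun a => pvAlive n roads (d + 1) a)]
  congr 1
  · apply List.countP_congr
    intro a _
    by_cases h1 : pvAlive n roads (d + 1) a = true
    · simp [h1, pvAlive_mono n roads d a h1]
    · simp [h1, Bool.eq_false_iff.mpr h1]
  · apply List.countP_congr
    intro a _
    by_cases h1 : pvAlive n roads d a = true <;>
      by_cases h2 : pvAdjS roads v a = true <;>
        by_cases h3 : pvAlive n roads (d + 1) a = true <;>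
          simp [h1, h2, h3]

theorem pvAns_neg_one_of_alive (n : Int) (roads : List (Int × Int)) (D : Nat) (c : Int)
    (h : pvAlive n roads D c = true) : pvAns n roads D c = -1 := by
  unfold pvAns
  have : (List.range (D + 1)).find? (fun e => !(pvAlive n roads e c)) = none := by
    rw [List.find?_eq_none]
    intro e he
    rw [List.mem_range] at he
    simp [pvAlive_le n roads (Nat.lt_succ_iff.mp he) c h]
  rw [this]

theorem pvAns_succ (n : Int) (roads : List (Int × Int)) (D : Nat) (c : Int) :
    pvAns n roads (D + 1) c =
      if pvAlive n roads D c = true ∧ ¬ pvAlive n roads (D + 1) c = true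
      then ((D + 1 : Nat) : Int) else pvAns n roads D c := by
  unfold pvAns
  rw [List.range_succ, List.find?_append]
  cases h : (List.range (D + 1)).find? (fun e => !(pvAlive n roads e c)) with
  | some e =>
    have he := List.find?_some h
    have hmem := List.mem_range.mp (List.mem_of_find?_eq_some h)
    have : ¬ pvAlive n roads D c = true := by
      intro hD
      have := pvAlive_le n roads (Nat.lt_succ_iff.mp hmem) c hD
      simp [this] at he
    simp [this]
  | none =>
    have hall : ∀ e, e < D + 1 → pvAlive n roads e c = true := by
      intro e he
      have := List.find?_eq_none.mp h e (List.mem_range.mpr he)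
      simpa using this
    have hD : pvAlive n roads D c = true := hall D (Nat.lt_succ_self D)
    by_cases hS : pvAlive n roads (D + 1) c = true
    · simp [hD, hS]
    · simp [hD, hS]

theorem pvAns_ne_neg_one_of_dead (n : Int) (roads : List (Int × Int)) (D : Nat) (c : Int)
    (h : ¬ pvAlive n roads D c = true) : pvAns n roads D c ≠ -1 := by
  unfold pvAns
  have hmem : D ∈ List.range (D + 1) := List.mem_range.mpr (Nat.lt_succ_self D)
  have : ((List.range (D + 1)).find? (fun e => !(pvAlive n roads e c))).isSome := by
    apply List.find?_isSome.mpr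
    exact ⟨D, hmem, by simp [h]⟩
  cases hf : (List.range (D + 1)).find? (fun e => !(pvAlive n roads e c)) with
  | none => rw [hf] at this; simp at this
  | some e =>
    have he : (match (some e : Option Nat) with | some e => (e : Int) | none => (-1 : Int)) = (e : Int) := rfl
    rw [he]
    omega

-- ---- stopping day ----
theorem pvFilterLenLt {α : Type} {l : List α} {p : α → Bool} {c : α} (hc : c ∈ l)
    (hp : ¬ p c = true) : (l.filter p).length < l.length := by
  induction l with
  | nil => cases hc
  | cons a l ih =>
    rcases List.mem_cons.mp hc with rfl | hc
    · rw [List.filter_cons_of_neg (by simpa using hp)]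
      simp only [List.length_cons]
      exact Nat.lt_succ_of_le (List.length_filter_le p l)
    · by_cases ha : p a = true
      · rw [List.filter_cons_of_pos ha]; simpa using ih hc
      · rw [List.filter_cons_of_neg (by simpa using ha)]
        simp only [List.length_cons]
        exact Nat.lt_succ_of_lt (ih hc)

def pvM (n : Int) (roads : List (Int × Int)) (d : Nat) : Nat :=
  ((PySem.List.pyRange 0 n 1).filter (fun c => pvAlive n roads d c)).length

theorem pvM_lt (n : Int) (roads : List (Int × Int)) (d : Nat) (h : pvR n roads d ≠ []) :
    pvM n roads (d + 1) < pvM n roads d := by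
  obtain ⟨c0, hc0⟩ := List.exists_mem_of_ne_nil _ h
  rw [mem_pvR] at hc0
  have hstep : ((PySem.List.pyRange 0 n 1).filter (fun c => pvAlive n roads (d + 1) c)) =
      ((PySem.List.pyRange 0 n 1).filter (fun c => pvAlive n roads d c)).filter
        (fun c => pvAlive n roads (d + 1) c) := by
    rw [List.filter_filter]
    apply List.filter_congr
    intro a _
    cases h1 : pvAlive n roads (d + 1) a with
    | false => simp
    | true => simp [pvAlive_mono n roads d a h1]
  unfold pvM
  rw [hstep]
  apply pvFilterLenLt
  · rw [List.mem_filter]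
    refine ⟨?_, hc0.1⟩
    rw [PySem.List.mem_pyRange_one]
    exact pvAlive_range n roads d c0 hc0.1
  · exact hc0.2

theorem pvR_empty_bounded (n : Int) (roads : List (Int × Int)) :
    ∃ d, d ≤ n.toNat ∧ pvR n roads d = [] := by
  by_contra hcon
  push_neg at hcon
  have hchain : ∀ k, (∀ d, d < k → pvR n roads d ≠ []) → pvM n roads k + k ≤ pvM n roads 0 := by
    intro k
    induction k with
    | zero => intro _; omega
    | succ k ih =>
      intro hall
      have h1 := ih (fun d hd => hall d (Nat.lt_succ_of_lt hd))
      have h2 := pvM_lt n roads k (hall k (Nat.lt_succ_self k))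
      omega
    
  have hM0 : pvM n roads 0 ≤ n.toNat := by
    have := List.length_filter_le (fun c => pvAlive n roads 0 c) (PySem.List.pyRange 0 n 1)
    unfold pvM
    have hlen : (PySem.List.pyRange 0 n 1).length = n.toNat := by
      rw [PySem.List.length_pyRange_one]; simp
    omega
  have := hchain (n.toNat + 1) (fun d hd => hcon d (by omega))
  omega

theorem pvR_empty_exists (n : Int) (roads : List (Int × Int)) : ∃ d, pvR n roads d = [] := by
  obtain ⟨d, _, hd⟩ := pvR_empty_bounded n roads
  exact ⟨d, hd⟩

def pvStop (n : Int) (roads : List (Int × Int)) : Nat := Nat.find (pvR_empty_exists n roads)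

theorem pvStop_le (n : Int) (roads : List (Int × Int)) : pvStop n roads ≤ n.toNat := by
  obtain ⟨d, hle, hd⟩ := pvR_empty_bounded n roads
  exact le_trans (Nat.find_min' _ hd) hle

theorem pvStop_spec (n : Int) (roads : List (Int × Int)) : pvR n roads (pvStop n roads) = [] :=
  Nat.find_spec (pvR_empty_exists n roads)

-- ---- generic fold lemmas ----
theorem pvFoldlFlatMap {α β γ : Type} (l : List α) (f : α → List β) (g : γ → β → γ) (init : γ) :
    (l.flatMap f).foldl g init = l.foldl (fun acc a => (f a).foldl g acc) init := by
  induction l generalizing init with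
  | nil => rfl
  | cons a l ih => rw [List.flatMap_cons, List.foldl_append, List.foldl_cons, ih]

theorem pvLengthFoldlPySetD (W : List Int) (a : List Int) (day : Int) :
    (W.foldl (fun a c => PySem.List.pySetD a c day) a).length = a.length := by
  induction W generalizing a with
  | nil => rfl
  | cons c W ih => rw [List.foldl_cons, ih, PySem.List.length_pySetD]

theorem pvGetDFoldlPySetD (W : List Int) (a : List Int) (day : Int) (k : Nat)
    (hW : ∀ c ∈ W, 0 ≤ c ∧ c < (a.length : Int)) (hk : k < a.length) :
    PySem.List.pyGetD (W.foldl (fun a c => PySem.List.pySetD a c day) a) (k : Int) 0 =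
      if ((k : Int) ∈ W) then day else PySem.List.pyGetD a (k : Int) 0 := by
  induction W generalizing a with
  | nil => simp
  | cons c W ih =>
    obtain ⟨hc0, hcn⟩ := hW c (List.mem_cons_self ..)
    rw [List.foldl_cons, PySem.List.pySetD_of_nonneg a day hc0]
    rw [ih (a.set c.toNat day)
        (by intro x hx; rw [List.length_set]; exact hW x (List.mem_cons_of_mem _ hx))
        (by rwa [List.length_set])]
    have hget : PySem.List.pyGetD (a.set c.toNat day) (k : Int) 0 =
        if (k : Int) = c then day else PySem.List.pyGetD a (k : Int) 0 := by
      rw [PySem.List.pyGetD_natCast, PySem.List.pyGetD_natCast]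
      rw [List.getD_eq_getElem _ _ (by rwa [List.length_set]), List.getD_eq_getElem _ _ hk]
      rw [List.getElem_set]
      by_cases h2 : (k : Int) = c
      · have hc : c.toNat = k := by omega
        simp [hc, h2]
      · have hc : ¬ c.toNat = k := by omega
        simp [hc, h2]
    rw [hget]
    by_cases h1 : (k : Int) ∈ W
    · simp [h1]
    · by_cases h2 : (k : Int) = c <;> simp [h1, h2]

theorem pvFoldlIfFilterP {α β : Type} (l : List α) (q : α → Prop) [DecidablePred q]
    (g : β → α → β) (init : β) :
    l.foldl (fun a p => if q p then g a p else a) init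
      = (l.filter (fun p => decide (q p))).foldl g init := by
  induction l generalizing init with
  | nil => rfl
  | cons a l ih =>
    by_cases ha : q a
    · rw [List.filter_cons_of_pos (by simpa using ha)]
      simp only [List.foldl_cons, if_pos ha]
      exact ih _
    · rw [List.filter_cons_of_neg (by simpa using ha)]
      simp only [List.foldl_cons, if_neg ha]
      exact ih _

theorem pvMemFoldlAdd (W : List Int) (s : PySem.Set Int) (y : Int) :
    y ∈ W.foldl (fun s c => PySem.Set.add s c) s ↔ y ∈ s ∨ y ∈ W := by
  induction W generalizing s with
  | nil => simp
  | cons c W ih =>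
    rw [List.foldl_cons, ih, PySem.Set.mem_add]
    constructor
    · rintro ((h | rfl) | h)
      · exact Or.inl h
      · exact Or.inr (List.mem_cons_self ..)
      · exact Or.inr (List.mem_cons_of_mem _ h)
    · rintro (h | h)
      · exact Or.inl (Or.inl h)
      · rcases List.mem_cons.mp h with rfl | h
        · exact Or.inl (Or.inr rfl)
        · exact Or.inr h

-- ---- dict items lemmas ----
theorem pvItemsFoldlErase (S : List Int) (d : PySem.Dict Int (PySem.Set Int)) :
    ((S.foldl (fun d c => d.erase c) d).items = d.items.filter (fun p => decide (p.1 ∉ S))) := by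
  induction S generalizing d with
  | nil => simp
  | cons c S ih =>
    rw [List.foldl_cons, ih]
    show (List.filter _ (List.filter _ d.items)) = _
    rw [List.filter_filter]
    apply List.filter_congr
    intro p _
    by_cases h1 : p.1 = c <;> by_cases h2 : p.1 ∈ S <;> simp [h1, h2]

theorem pvItemsFoldlInsertPresent (C : List Int) (pre : List (Int × PySem.Set Int))
    (f g : Int → PySem.Set Int) (hnd : C.Nodup) (hdis : ∀ c ∈ C, ∀ q ∈ pre, q.1 ≠ c) :
    (C.foldl (fun d c => PySem.Dict.insert d c (g c))
        (PySem.Dict.mk (pre ++ C.map (fun c => (c, f c))))).items =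
      pre ++ C.map (fun c => (c, g c)) := by
  induction C generalizing pre with
  | nil => simp
  | cons c C ih =>
    have hcC : c ∉ C := (List.nodup_cons.mp hnd).1
    rw [List.foldl_cons]
    have hcont : (PySem.Dict.mk (pre ++ (c :: C).map (fun x => (x, f x)))).contains c = true := by
      rw [PySem.Dict.contains_iff_mem_keys]
      simp [PySem.Dict.keys]
    have hins : (PySem.Dict.insert (PySem.Dict.mk (pre ++ (c :: C).map (fun x => (x, f x)))) c (g c)) =
        PySem.Dict.mk ((pre ++ [(c, g c)]) ++ C.map (fun x => (x, f x))) := by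
      apply PySem.Dict.ext
      rw [PySem.Dict.items_insert_of_contains _ (g c) hcont]
      show (pre ++ (c, f c) :: C.map (fun x => (x, f x))).map _ = _
      rw [List.map_append, List.map_cons]
      have h1 : pre.map (fun p => if p.1 == c then (c, g c) else p) = pre := by
        have hmc : ∀ q ∈ pre, (if q.1 == c then (c, g c) else q) = id q := by
          intro q hq; simp [hdis c (List.mem_cons_self ..) q hq]
        rw [List.map_congr_left hmc, List.map_id]
      have h2 : (C.map (fun x => (x, f x))).map (fun p => if p.1 == c then (c, g c) else p)
          = C.map (fun x => (x, f x)) := by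
        rw [List.map_map]
        apply List.map_congr_left
        intro x hx
        have : x ≠ c := fun h => hcC (h ▸ hx)
        simp [Function.comp, this]
      rw [h1, h2]
      simp
    rw [hins]
    rw [ih (pre ++ [(c, g c)]) (List.nodup_cons.mp hnd).2 ?_]
    · simp
    · intro x hx q hq
      rcases List.mem_append.mp hq with hq | hq
      · exact hdis x (List.mem_cons_of_mem _ hx) q hq
      · rcases List.mem_singleton.mp hq with rfl
        intro h
        simp only at h
        exact hcC (by rw [h]; exact hx)

-- ---- A-side construction ----
theorem pvKeysMkMap (C : List Int) (val : Int → PySem.Set Int) :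
    (PySem.Dict.mk (C.map (fun c => (c, val c)))).keys = C := by
  show (C.map (fun c => (c, val c))).map (fun x => x.1) = C
  rw [List.map_map]
  refine (List.map_congr_left ?_).trans (List.map_id C)
  exact fun c _ => rfl

theorem pvItemsMapModify (C : List Int) (val : Int → PySem.Set Int) (c₀ : Int)
    (dflt : PySem.Set Int) (f : PySem.Set Int → PySem.Set Int) (hnd : C.Nodup) (hc₀ : c₀ ∈ C) :
    ((PySem.Dict.mk (C.map (fun c => (c, val c)))).modify c₀ dflt f).items
      = C.map (fun c => (c, if c = c₀ then f (val c₀) else val c)) := by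
  have hkeys : (PySem.Dict.mk (C.map (fun c => (c, val c)))).keys = C := pvKeysMkMap C val
  have hget : (PySem.Dict.mk (C.map (fun c => (c, val c)))).getD c₀ dflt = val c₀ := by
    apply PySem.Dict.getD_of_mem_items
    · exact List.mem_map.mpr ⟨c₀, hc₀, rfl⟩
    · rw [hkeys]; exact hnd
  have hcont : (PySem.Dict.mk (C.map (fun c => (c, val c)))).contains c₀ = true := by
    rw [PySem.Dict.contains_iff_mem_keys, hkeys]; exact hc₀
  have hmod : (PySem.Dict.mk (C.map (fun c => (c, val c)))).modify c₀ dflt f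
      = (PySem.Dict.mk (C.map (fun c => (c, val c)))).insert c₀
          (f ((PySem.Dict.mk (C.map (fun c => (c, val c)))).getD c₀ dflt)) := rfl
  rw [hmod, hget, PySem.Dict.items_insert_of_contains _ (f (val c₀)) hcont]
  show (C.map (fun c => (c, val c))).map _ = _
  rw [List.map_map]
  apply List.map_congr_left
  intro x _
  by_cases hx : x = c₀
  · simp [Function.comp, hx]
  · simp [Function.comp, hx]

theorem pvAdjS_append_single (rs : List (Int × Int)) (a b c v : Int) :
    pvAdjS (rs ++ [(a, b)]) c v
      = (pvAdjS rs c v || ((a == c && b == v) || (a == v && b == c))) := by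
  simp [pvAdjS, List.any_append]

theorem pvAdjS_in_range (n : Int) (roads : List (Int × Int))
    (hpre : Pre_citiesConquering n roads) (c v : Int) (h : pvAdjS roads c v = true) :
    (0 ≤ c ∧ c < n) ∧ (0 ≤ v ∧ v < n) := by
  unfold pvAdjS at h
  rw [List.any_eq_true] at h
  obtain ⟨p, hp, hcase⟩ := h
  have := hpre p hp
  rcases Bool.or_eq_true_iff.mp hcase with h1 | h1 <;>
    · have h2 := Bool.and_eq_true_iff.mp h1
      have e1 := of_decide_eq_true (by simpa using h2.1)
      have e2 := of_decide_eq_true (by simpa using h2.2)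
      subst e1; subst e2
      omega

theorem pvAinit_items (n : Int) (roads : List (Int × Int))
    (hpre : Pre_citiesConquering n roads) :
    ∃ val : Int → PySem.Set Int,
      (pvAinit n roads).items = (PySem.List.pyRange 0 n 1).map (fun c => (c, val c)) ∧
      ∀ c, (val c).Nodup ∧ ∀ v, (v ∈ val c ↔ pvAdjS roads c v = true) := by
  unfold pvAinit
  induction roads using List.reverseRecOn with
  | nil =>
    refine ⟨fun _ => ([] : List Int), ?_, ?_⟩
    · rw [List.foldl_nil]
      have := PySem.Dict.items_foldl_insert_fresh (PySem.List.pyRange 0 n 1)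
        (fun a => a) (fun _ => (PySem.Set.empty : PySem.Set Int))
        (PySem.Dict.empty : PySem.Dict Int (PySem.Set Int))
        (fun a _ => PySem.Dict.contains_empty a)
        (by simpa using PySem.List.nodup_pyRange_one 0 n)
      simpa [PySem.Set.empty, PySem.Dict.empty] using this
    · intro c
      exact ⟨List.nodup_nil, fun v => by simp [pvAdjS]⟩
  | append_singleton rs p ih =>
    have hpre' : Pre_citiesConquering n rs := fun q hq => hpre q (List.mem_append_left _ hq)
    obtain ⟨val, hitems, hval⟩ := ih hpre'
    have hp := hpre p (List.mem_append_right _ (List.mem_singleton.mpr rfl))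
    have hmem_a : p.1 ∈ PySem.List.pyRange 0 n 1 := by
      rw [PySem.List.mem_pyRange_one]; exact ⟨hp.1.1, hp.1.2⟩
    have hmem_b : p.2 ∈ PySem.List.pyRange 0 n 1 := by
      rw [PySem.List.mem_pyRange_one]; exact ⟨hp.2.1, hp.2.2⟩
    have hnd := PySem.List.nodup_pyRange_one 0 n
    rw [List.foldl_append, List.foldl_cons, List.foldl_nil]
    set d := rs.foldl (fun d p =>
      (d.modify p.1 PySem.Set.empty (fun s => PySem.Set.add s p.2)).modify p.2 PySem.Set.empty
        (fun s => PySem.Set.add s p.1)) ((PySem.List.pyRange 0 n 1).foldl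
        (fun d k => d.insert k PySem.Set.empty) PySem.Dict.empty) with hd
    have hdmk : d = PySem.Dict.mk ((PySem.List.pyRange 0 n 1).map (fun c => (c, val c))) :=
      PySem.Dict.ext hitems
    set val₁ : Int → PySem.Set Int :=
      fun c => if c = p.1 then PySem.Set.add (val p.1) p.2 else val c with hval₁
    have h1 : (d.modify p.1 PySem.Set.empty (fun s => PySem.Set.add s p.2))
        = PySem.Dict.mk ((PySem.List.pyRange 0 n 1).map (fun c => (c, val₁ c))) := by
      apply PySem.Dict.ext
      rw [hdmk]
      exact pvItemsMapModify _ val p.1 _ _ hnd hmem_a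
    set val₂ : Int → PySem.Set Int :=
      fun c => if c = p.2 then PySem.Set.add (val₁ p.2) p.1 else val₁ c with hval₂
    have h2 : ((d.modify p.1 PySem.Set.empty (fun s => PySem.Set.add s p.2)).modify p.2
          PySem.Set.empty (fun s => PySem.Set.add s p.1))
        = PySem.Dict.mk ((PySem.List.pyRange 0 n 1).map (fun c => (c, val₂ c))) := by
      apply PySem.Dict.ext
      rw [h1]
      exact pvItemsMapModify _ val₁ p.2 _ _ hnd hmem_b
    refine ⟨val₂, by rw [h2], ?_⟩
    intro c
    refine ⟨?_, ?_⟩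
    · simp only [hval₂, hval₁]
      split_ifs with h1 h2 h2
      · exact PySem.Set.nodup_add _ _ (PySem.Set.nodup_add _ _ (hval p.1).1)
      · exact PySem.Set.nodup_add _ _ (hval p.2).1
      · exact PySem.Set.nodup_add _ _ (hval p.1).1
      · exact (hval c).1
    intro v
    rw [pvAdjS_append_single rs p.1 p.2 c v]
    have hv : ∀ c v, v ∈ val c ↔ pvAdjS rs c v = true := fun c v => (hval c).2 v
    simp only [hval₂, hval₁, Bool.or_eq_true, Bool.and_eq_true, beq_iff_eq]
    by_cases hcb : c = p.2
    · rw [if_pos hcb, PySem.Set.mem_add]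
      by_cases hba : p.2 = p.1
      · rw [if_pos hba, PySem.Set.mem_add, hv]
        constructor
        · rintro ((h | rfl) | rfl)
          · exact Or.inl (by rw [hcb, hba]; exact h)
          · exact Or.inr (Or.inl ⟨hba.symm.trans hcb.symm, rfl⟩)
          · exact Or.inr (Or.inr ⟨rfl, hcb.symm⟩)
        · rintro (h | ⟨h1, h2⟩ | ⟨h1, h2⟩)
          · exact Or.inl (Or.inl (by rw [hcb, hba] at h; exact h))
          · exact Or.inl (Or.inr h2.symm)
          · exact Or.inr h1.symm
      · rw [if_neg hba, hv]
        constructor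
        · rintro (h | rfl)
          · exact Or.inl (by rw [hcb]; exact h)
          · exact Or.inr (Or.inr ⟨rfl, hcb.symm⟩)
        · rintro (h | ⟨h1, h2⟩ | ⟨h1, h2⟩)
          · exact Or.inl (by rw [← hcb]; exact h)
          · exact absurd (h1.trans hcb).symm hba
          · exact Or.inr h1.symm
    · rw [if_neg hcb]
      by_cases hca : c = p.1
      · rw [if_pos hca, PySem.Set.mem_add, hv]
        constructor
        · rintro (h | rfl)
          · exact Or.inl (by rw [hca]; exact h)
          · exact Or.inr (Or.inl ⟨hca.symm, rfl⟩)
        · rintro (h | ⟨h1, h2⟩ | ⟨h1, h2⟩)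
          · exact Or.inl (by rw [← hca]; exact h)
          · exact Or.inr h2.symm
          · exact absurd h2.symm hcb
      · rw [if_neg hca, hv]
        constructor
        · exact fun h => Or.inl h
        · rintro (h | ⟨h1, h2⟩ | ⟨h1, h2⟩)
          · exact h
          · exact absurd h1.symm hca
          · exact absurd h2.symm hcb

-- ---- A-side invariant ----
def pvIA (n : Int) (roads : List (Int × Int)) (d : Nat)
    (free : PySem.Dict Int (PySem.Set Int)) (conq : PySem.Set (Option Int)) (ans : List Int) :
    Prop :=
  d ≤ pvStop n roads + 1 ∧
  (∃ val : Int → PySem.Set Int,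
    free.items = ((PySem.List.pyRange 0 n 1).filter (fun c => pvAlive n roads d c)).map
        (fun c => (c, val c)) ∧
    ∀ c, pvAlive n roads d c = true → (val c).Nodup ∧
      ∀ v, (v ∈ val c ↔ (pvAdjS roads c v = true ∧ pvAlive n roads (d - 1) v = true))) ∧
  (if d = 0 then conq = [none]
   else ∀ x, x ∈ conq ↔ ∃ c, x = some c ∧ c ∈ pvR n roads (d - 1)) ∧
  ans = (PySem.List.pyRange 0 n 1).map (fun c => pvAns n roads d c)

theorem pvAstepFst (conq : PySem.Set (Option Int)) (day : Int) (L : List (Int × PySem.Set Int)) :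
    ∀ (fr : PySem.Dict Int (PySem.Set Int)) (ans : List Int) (nc : PySem.Set Int),
      (L.foldl (pvAstep conq day) (fr, ans, nc)).1 =
        L.foldl (fun f p => f.insert p.1
          (p.2.filter (fun x => !(PySem.Set.contains conq (some x))))) fr := by
  induction L with
  | nil => intro fr ans nc; rfl
  | cons p L ih =>
    intro fr ans nc
    rw [List.foldl_cons, List.foldl_cons]
    unfold pvAstep
    by_cases hc : PySem.Set.len (p.2.filter (fun x => !(PySem.Set.contains conq (some x)))) ≤ 1
    · rw [if_pos hc]; exact ih _ _ _
    · rw [if_neg hc]; exact ih _ _ _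

theorem pvAstepSnd (conq : PySem.Set (Option Int)) (day : Int) (L : List (Int × PySem.Set Int)) :
    ∀ (fr : PySem.Dict Int (PySem.Set Int)) (ans : List Int) (nc : PySem.Set Int),
      (L.foldl (pvAstep conq day) (fr, ans, nc)).2.1 =
        L.foldl (fun a p =>
          if PySem.Set.len (p.2.filter (fun x => !(PySem.Set.contains conq (some x)))) ≤ 1
          then PySem.List.pySetD a p.1 day else a) ans := by
  induction L with
  | nil => intro fr ans nc; rfl
  | cons p L ih =>
    intro fr ans nc
    rw [List.foldl_cons, List.foldl_cons]
    unfold pvAstep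
    by_cases hc : PySem.Set.len (p.2.filter (fun x => !(PySem.Set.contains conq (some x)))) ≤ 1
    · rw [if_pos hc, if_pos hc]; exact ih _ _ _
    · rw [if_neg hc, if_neg hc]; exact ih _ _ _

theorem pvAstepThd (conq : PySem.Set (Option Int)) (day : Int) (L : List (Int × PySem.Set Int)) :
    ∀ (fr : PySem.Dict Int (PySem.Set Int)) (ans : List Int) (nc : PySem.Set Int),
      (L.foldl (pvAstep conq day) (fr, ans, nc)).2.2 =
        L.foldl (fun s p =>
          if PySem.Set.len (p.2.filter (fun x => !(PySem.Set.contains conq (some x)))) ≤ 1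
          then PySem.Set.add s p.1 else s) nc := by
  induction L with
  | nil => intro fr ans nc; rfl
  | cons p L ih =>
    intro fr ans nc
    rw [List.foldl_cons, List.foldl_cons]
    unfold pvAstep
    by_cases hc : PySem.Set.len (p.2.filter (fun x => !(PySem.Set.contains conq (some x)))) ≤ 1
    · rw [if_pos hc, if_pos hc]; exact ih _ _ _
    · rw [if_neg hc, if_neg hc]; exact ih _ _ _

theorem pvRiff (n : Int) (roads : List (Int × Int)) (d : Nat) (c : Int) :
    (pvAlive n roads d c = true ∧ pvDeg n roads d c ≤ 1) ↔ c ∈ pvR n roads d := by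
  rw [mem_pvR]
  constructor
  · rintro ⟨h1, h2⟩
    refine ⟨h1, ?_⟩
    rw [pvAlive_succ]
    simp only [h1, Bool.true_and]
    intro hcon
    have := of_decide_eq_true hcon
    omega
  · rintro ⟨h1, h2⟩
    refine ⟨h1, ?_⟩
    rw [pvAlive_succ, h1, Bool.true_and] at h2
    by_cases hd : pvDeg n roads d c ≤ 1
    · exact hd
    · exact absurd (decide_eq_true (by omega : 2 ≤ pvDeg n roads d c)) h2

theorem pvAround (n : Int) (roads : List (Int × Int)) (hpre : Pre_citiesConquering n roads)
    (d : Nat) (free : PySem.Dict Int (PySem.Set Int)) (conq : PySem.Set (Option Int))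
    (ans : List Int) (hIA : pvIA n roads d free conq ans) (hne : ¬ conq = []) :
    pvIA n roads (d + 1)
      ((free.items.foldl (pvAstep conq ((d : Int) + 1)) (free, ans, PySem.Set.empty)).2.2.foldl
        (fun d c => d.erase c)
        (free.items.foldl (pvAstep conq ((d : Int) + 1)) (free, ans, PySem.Set.empty)).1)
      (((free.items.foldl (pvAstep conq ((d : Int) + 1)) (free, ans, PySem.Set.empty)).2.2).map
        (fun c => some c))
      (free.items.foldl (pvAstep conq ((d : Int) + 1)) (free, ans, PySem.Set.empty)).2.1 := by
  obtain ⟨hdle, ⟨val, hitems, hval⟩, hconq, hans⟩ := hIA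
  have hdstop : d ≤ pvStop n roads := by
    rcases Nat.lt_or_ge d (pvStop n roads + 1) with h | h
    · omega
    · exfalso
      have hd1 : d = pvStop n roads + 1 := by omega
      have h0 : ¬ d = 0 := by omega
      rw [if_neg h0] at hconq
      obtain ⟨x, hx⟩ := List.exists_mem_of_ne_nil conq hne
      obtain ⟨c, -, hcR⟩ := (hconq x).mp hx
      rw [hd1] at hcR
      simp only [Nat.add_sub_cancel] at hcR
      rw [pvStop_spec n roads] at hcR
      cases hcR
  set C : List Int := (PySem.List.pyRange 0 n 1).filter (fun c => pvAlive n roads d c) with hC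
  have hCnd : C.Nodup := (PySem.List.nodup_pyRange_one 0 n).filter _
  have hCmem : ∀ c, c ∈ C ↔ pvAlive n roads d c = true := by
    intro c
    rw [hC, List.mem_filter, PySem.List.mem_pyRange_one]
    exact ⟨fun h => h.2, fun h => ⟨pvAlive_range n roads d c h, h⟩⟩
  have hfilt : ∀ c, pvAlive n roads d c = true →
      (((val c).filter (fun x => !(PySem.Set.contains conq (some x)))).Nodup ∧
       (∀ v, v ∈ (val c).filter (fun x => !(PySem.Set.contains conq (some x))) ↔
          (pvAdjS roads c v = true ∧ pvAlive n roads d v = true))) := by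
    intro c hc
    refine ⟨((hval c hc).1).filter _, ?_⟩
    intro v
    rw [List.mem_filter, (hval c hc).2 v]
    by_cases h0 : d = 0
    · subst h0
      rw [if_pos rfl] at hconq
      subst hconq
      simp [PySem.Set.contains]
    · rw [if_neg h0] at hconq
      obtain ⟨e, rfl⟩ : ∃ e, d = e + 1 := ⟨d - 1, by omega⟩
      simp only [Nat.add_sub_cancel]
      constructor
      · rintro ⟨⟨hadj, halive⟩, hnc⟩
        refine ⟨hadj, ?_⟩
        by_contra hdead
        have hmem : (some v) ∈ conq :=
          (hconq (some v)).mpr ⟨v, rfl, (mem_pvR n roads e v).mpr ⟨halive, hdead⟩⟩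
        have hncP : (some v) ∉ conq := by simpa using hnc
        exact hncP hmem
      · rintro ⟨hadj, halive⟩
        have halive' := pvAlive_mono n roads e v halive
        refine ⟨⟨hadj, halive'⟩, ?_⟩
        have hnmem : (some v) ∉ conq := by
          intro hcmem
          obtain ⟨c', hc', hR⟩ := (hconq (some v)).mp hcmem
          cases hc'
          exact ((mem_pvR n roads e v).mp hR).2 halive
        simpa using hnmem
  have hlen : ∀ c, pvAlive n roads d c = true →
      ((val c).filter (fun x => !(PySem.Set.contains conq (some x)))).length
        = pvDeg n roads d c := by
    intro c hc
    exact pvDeg_eq_of_set n roads d c (hfilt c hc).1 (hfilt c hc).2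
  have hcondiff : ∀ c, pvAlive n roads d c = true →
      ((PySem.Set.len ((val c).filter (fun x => !(PySem.Set.contains conq (some x)))) ≤ 1)
        ↔ pvDeg n roads d c ≤ 1) := by
    intro c hc
    have := hlen c hc
    simp only [PySem.Set.len]
    omega
  have hfree : free = PySem.Dict.mk (C.map (fun c => (c, val c))) := PySem.Dict.ext hitems
  have hfst : (free.items.foldl (pvAstep conq ((d : Int) + 1)) (free, ans, PySem.Set.empty)).1 =
      PySem.Dict.mk (C.map (fun c =>
        (c, (val c).filter (fun x => !(PySem.Set.contains conq (some x)))))) := by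
    rw [pvAstepFst, hitems, List.foldl_map]
    conv_lhs => rw [hfree]
    apply PySem.Dict.ext
    have := pvItemsFoldlInsertPresent C [] val
      (fun c => (val c).filter (fun x => !(PySem.Set.contains conq (some x)))) hCnd
      (by intro c _ q hq; cases hq)
    simpa using this
  have hsnd : (free.items.foldl (pvAstep conq ((d : Int) + 1)) (free, ans, PySem.Set.empty)).2.1 =
      (C.filter (fun c => decide (PySem.Set.len ((val c).filter
          (fun x => !(PySem.Set.contains conq (some x)))) ≤ 1))).foldl
        (fun a c => PySem.List.pySetD a c ((d : Int) + 1)) ans := by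
    rw [pvAstepSnd, hitems, List.foldl_map, pvFoldlIfFilterP]
  have hthd : ∀ y, (y ∈ (free.items.foldl (pvAstep conq ((d : Int) + 1))
        (free, ans, PySem.Set.empty)).2.2 ↔
      y ∈ C.filter (fun c => decide (PySem.Set.len ((val c).filter
          (fun x => !(PySem.Set.contains conq (some x)))) ≤ 1))) := by
    intro y
    rw [pvAstepThd, hitems, List.foldl_map, pvFoldlIfFilterP, pvMemFoldlAdd]
    simp [PySem.Set.empty]
  set W : List Int := C.filter (fun c => decide (PySem.Set.len ((val c).filter
      (fun x => !(PySem.Set.contains conq (some x)))) ≤ 1)) with hWdef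
  have hWmem : ∀ c, c ∈ W ↔ c ∈ pvR n roads d := by
    intro c
    rw [hWdef, List.mem_filter]
    constructor
    · rintro ⟨hcC, hdec⟩
      have hc := (hCmem c).mp hcC
      exact (pvRiff n roads d c).mp ⟨hc, (hcondiff c hc).mp (of_decide_eq_true hdec)⟩
    · intro hR
      obtain ⟨hc, hd1⟩ := (pvRiff n roads d c).mpr hR
      exact ⟨(hCmem c).mpr hc, decide_eq_true ((hcondiff c hc).mpr hd1)⟩
  have hWnd : W.Nodup := hCnd.filter _
  have hWrange : ∀ c ∈ W, 0 ≤ c ∧ c < n := by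
    intro c hc
    rw [hWdef, List.mem_filter] at hc
    exact pvAlive_range n roads d c ((hCmem c).mp hc.1)
  have hncmem : ∀ (a : Int), (decide (a ∉ (free.items.foldl (pvAstep conq ((d : Int) + 1))
      (free, ans, PySem.Set.empty)).2.2)) = !(decide (a ∈ pvR n roads d)) := by
    intro a
    by_cases h : a ∈ pvR n roads d
    · have hm := (hthd a).mpr ((hWmem a).mpr h)
      rw [decide_eq_true h, decide_eq_false (not_not_intro hm)]
      rfl
    · have hnm : a ∉ (free.items.foldl (pvAstep conq ((d : Int) + 1))
          (free, ans, PySem.Set.empty)).2.2 := fun hm => h ((hWmem a).mp ((hthd a).mp hm))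
      rw [decide_eq_true hnm, decide_eq_false h]
      rfl
  refine ⟨by omega, ?_, ?_, ?_⟩
  · refine ⟨fun c => (val c).filter (fun x => !(PySem.Set.contains conq (some x))), ?_, ?_⟩
    · rw [pvItemsFoldlErase, hfst]
      show (C.map _).filter _ = _
      rw [List.filter_map]
      have h1 : C.filter ((fun (p : Int × PySem.Set Int) =>
            decide (p.1 ∉ (free.items.foldl (pvAstep conq ((d : Int) + 1))
              (free, ans, PySem.Set.empty)).2.2)) ∘
            (fun c => (c, (val c).filter (fun x => !(PySem.Set.contains conq (some x))))))
          = (PySem.List.pyRange 0 n 1).filter (fun c => pvAlive n roads (d + 1) c) := by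
        rw [hC, List.filter_filter]
        apply List.filter_congr
        intro a ha
        simp only [Function.comp]
        rw [hncmem a]
        by_cases h1 : pvAlive n roads d a = true
        · by_cases h2 : pvAlive n roads (d + 1) a = true
          · have hnR : a ∉ pvR n roads d := fun hm => ((mem_pvR n roads d a).mp hm).2 h2
            simp [h1, h2, hnR]
          · have hR : a ∈ pvR n roads d := (mem_pvR n roads d a).mpr ⟨h1, h2⟩
            simp [h1, h2, hR]
        · have h2 : ¬ pvAlive n roads (d + 1) a = true :=
            fun hh => h1 (pvAlive_mono n roads d a hh)
          have hnR : a ∉ pvR n roads d := fun hm => h1 ((mem_pvR n roads d a).mp hm).1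
          simp [h1, h2, hnR]
      rw [h1]
    · intro c hc
      have hcd := pvAlive_mono n roads d c hc
      refine ⟨(hfilt c hcd).1, ?_⟩
      intro v
      rw [(hfilt c hcd).2 v]
      simp only [Nat.add_sub_cancel]
  · rw [if_neg (Nat.succ_ne_zero d)]
    intro x
    rw [List.mem_map]
    simp only [Nat.add_sub_cancel]
    constructor
    · rintro ⟨a, ha, rfl⟩
      exact ⟨a, rfl, (hWmem a).mp ((hthd a).mp ha)⟩
    · rintro ⟨c, rfl, hc⟩
      exact ⟨c, (hthd c).mpr ((hWmem c).mpr hc), rfl⟩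
  · rw [hsnd, hans]
    apply List.ext_getElem
    · rw [pvLengthFoldlPySetD]; simp
    intro k hk1 hk2
    have hklen : k < ((PySem.List.pyRange 0 n 1).map (fun c => pvAns n roads d c)).length := by
      rw [pvLengthFoldlPySetD] at hk1; exact hk1
    have hkr : k < (PySem.List.pyRange 0 n 1).length := by simpa using hklen
    have hkn : (k : Int) < n := by
      rw [PySem.List.length_pyRange_one] at hkr
      omega
    have hWr : ∀ c ∈ W, 0 ≤ c ∧
        c < (((PySem.List.pyRange 0 n 1).map (fun c => pvAns n roads d c)).length : Int) := by
      intro c hcW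
      obtain ⟨h1, h2⟩ := hWrange c hcW
      refine ⟨h1, ?_⟩
      rw [List.length_map, PySem.List.length_pyRange_one]
      omega
    have hg := pvGetDFoldlPySetD W ((PySem.List.pyRange 0 n 1).map (fun c => pvAns n roads d c))
      ((d : Int) + 1) k hWr hklen
    rw [PySem.List.pyGetD_natCast, List.getD_eq_getElem _ _ hk1] at hg
    rw [PySem.List.pyGetD_map_pyRange_of_nonneg _ _ _ _ (by omega) hkn] at hg
    rw [hg, List.getElem_map, PySem.List.getElem_pyRange_one, zero_add, pvAns_succ]
    by_cases hkW : (k : Int) ∈ W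
    · have hcond := (mem_pvR n roads d ((k : Int))).mp ((hWmem _).mp hkW)
      rw [if_pos hkW, if_pos hcond]
      push_cast
      ring
    · have hcond : ¬ (pvAlive n roads d (k : Int) = true ∧
          ¬ pvAlive n roads (d + 1) (k : Int) = true) :=
        fun hh => hkW ((hWmem _).mpr ((mem_pvR n roads d ((k : Int))).mpr hh))
      rw [if_neg hkW, if_neg hcond]

-- ---- A main loop ----
theorem pvAloopEq (n : Int) (roads : List (Int × Int)) (hpre : Pre_citiesConquering n roads) :
    ∀ (fuel d : Nat) (free : PySem.Dict Int (PySem.Set Int)) (conq : PySem.Set (Option Int))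
      (ans : List Int), pvIA n roads d free conq ans →
      pvStop n roads + 1 ≤ d + fuel →
      pvAloop fuel free conq ans (d : Int) =
        (PySem.List.pyRange 0 n 1).map (fun c => pvAns n roads (pvStop n roads + 1) c) := by
  intro fuel
  induction fuel with
  | zero =>
    intro d free conq ans hIA hf
    obtain ⟨hdle, -, -, hans⟩ := hIA
    have hd : d = pvStop n roads + 1 := by omega
    show ans = _
    rw [hans, hd]
  | succ fuel ih =>
    intro d free conq ans hIA hf
    rw [pvAloop]
    by_cases hc : conq = []
    · rw [if_pos hc]
      obtain ⟨hdle, -, hconq, hans⟩ := hIA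
      have hd0 : ¬ d = 0 := by
        intro h0
        subst h0
        rw [if_pos rfl] at hconq
        rw [hconq] at hc
        cases hc
      rw [if_neg hd0] at hconq
      have hRempty : pvR n roads (d - 1) = [] := by
        rw [List.eq_nil_iff_forall_not_mem]
        intro c hcR
        have hmem : (some c) ∈ conq := (hconq (some c)).mpr ⟨c, rfl, hcR⟩
        rw [hc] at hmem
        cases hmem
      have hstople : pvStop n roads ≤ d - 1 := Nat.find_min' _ hRempty
      have hd : d = pvStop n roads + 1 := by omega
      rw [hans, hd]
    · rw [if_neg hc]
      have hstep := pvAround n roads hpre d free conq ans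
        ⟨(hIA).1, (hIA).2.1, (hIA).2.2.1, (hIA).2.2.2⟩ hc
      show pvAloop fuel
          ((free.items.foldl (pvAstep conq ((d : Int) + 1)) (free, ans, PySem.Set.empty)).2.2.foldl
            (fun d c => d.erase c)
            (free.items.foldl (pvAstep conq ((d : Int) + 1)) (free, ans, PySem.Set.empty)).1)
          (((free.items.foldl (pvAstep conq ((d : Int) + 1))
              (free, ans, PySem.Set.empty)).2.2).map (fun c => some c))
          (free.items.foldl (pvAstep conq ((d : Int) + 1)) (free, ans, PySem.Set.empty)).2.1
          ((d : Int) + 1) = _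
      have hcast : ((d : Int) + 1) = ((d + 1 : Nat) : Int) := by push_cast; ring
      rw [hcast]
      exact ih (d + 1) _ _ _ hstep (by omega)

theorem pvAinitIA (n : Int) (roads : List (Int × Int)) (hpre : Pre_citiesConquering n roads) :
    pvIA n roads 0 (pvAinit n roads) (PySem.Set.ofList [none])
      ((PySem.List.pyRange 0 n 1).map (fun _ => (-1 : Int))) := by
  obtain ⟨val, hitems, hval⟩ := pvAinit_items n roads hpre
  refine ⟨by omega, ⟨val, ?_, ?_⟩, ?_, ?_⟩
  · have hfeq : (PySem.List.pyRange 0 n 1).filter (fun c => pvAlive n roads 0 c)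
        = PySem.List.pyRange 0 n 1 := by
      apply List.filter_eq_self.mpr
      intro a ha
      rw [PySem.List.mem_pyRange_one] at ha
      rw [pvAlive_zero]
      exact decide_eq_true ha
    rw [hfeq]
    exact hitems
  · intro c hc
    refine ⟨(hval c).1, ?_⟩
    intro v
    rw [(hval c).2 v]
    constructor
    · intro h
      refine ⟨h, ?_⟩
      show pvAlive n roads 0 v = true
      rw [pvAlive_zero]
      exact decide_eq_true (pvAdjS_in_range n roads hpre c v h).2
    · exact fun h => h.1
  · rw [if_pos rfl]
    rfl
  · apply List.map_congr_left
    intro c hcmem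
    rw [PySem.List.mem_pyRange_one] at hcmem
    have hal : pvAlive n roads 0 c = true := by
      rw [pvAlive_zero]; exact decide_eq_true hcmem
    exact (pvAns_neg_one_of_alive n roads 0 c hal).symm

theorem pvAEq (n : Int) (roads : List (Int × Int)) (hpre : Pre_citiesConquering n roads) :
    citiesConquering n roads =
      (PySem.List.pyRange 0 n 1).map (fun c => pvAns n roads (pvStop n roads + 1) c) := by
  unfold citiesConquering
  have hfuel : pvStop n roads + 1 ≤ 0 + (n.toNat + 2) := by
    have := pvStop_le n roads; omega
  have h := pvAloopEq n roads hpre (n.toNat + 2) 0 (pvAinit n roads) (PySem.Set.ofList [none])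
    ((PySem.List.pyRange 0 n 1).map (fun _ => (-1 : Int))) (pvAinitIA n roads hpre) hfuel
  simpa using h

-- ---- B-side construction ----
theorem pvBadd_len (adj : List (List Int)) (x y : Int) : (pvBadd adj x y).length = adj.length := by
  unfold pvBadd
  rw [PySem.List.length_pySetD]

theorem pvBadd_get (adj : List (List Int)) (x y c : Int) (hx : 0 ≤ x)
    (hxl : x < (adj.length : Int)) (hc : 0 ≤ c) (hcl : c < (adj.length : Int)) :
    PySem.List.pyGetD (pvBadd adj x y) c [] =
      if c = x then PySem.List.pyGetD adj x [] ++ [y] else PySem.List.pyGetD adj c [] := by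
  unfold pvBadd
  rw [PySem.List.pySetD_of_nonneg _ _ hx]
  have hcnat : c = ((c.toNat : Nat) : Int) := (Int.toNat_of_nonneg hc).symm
  have hxnat : x = ((x.toNat : Nat) : Int) := (Int.toNat_of_nonneg hx).symm
  rw [hcnat, hxnat, PySem.List.pyGetD_natCast, PySem.List.pyGetD_natCast,
    PySem.List.pyGetD_natCast]
  rw [List.getD_eq_getElem _ _ (by rw [List.length_set]; omega),
    List.getD_eq_getElem _ _ (by omega), List.getD_eq_getElem _ _ (by omega)]
  rw [List.getElem_set]
  split_ifs with h1 h2 h2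
  · rfl
  · omega
  · omega
  · rfl

theorem pvBbuildAux (n : Int) (rs : List (Int × Int))
    (hpre : ∀ p ∈ rs, (0 ≤ p.1 ∧ p.1 < n) ∧ (0 ≤ p.2 ∧ p.2 < n)) :
    (pvBbuild n rs).1.length = n.toNat ∧
    (∀ x : Int × Int, x ∈ (pvBbuild n rs).2 ↔ pvAdjS rs x.1 x.2 = true) ∧
    (∀ c : Int, 0 ≤ c → c < n →
      ((PySem.List.pyGetD (pvBbuild n rs).1 c []).Nodup ∧
       ∀ v, (v ∈ PySem.List.pyGetD (pvBbuild n rs).1 c [] ↔ pvAdjS rs c v = true))) := by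
  induction rs using List.reverseRecOn with
  | nil =>
    refine ⟨by simp [pvBbuild, PySem.List.length_pyRange_one], ?_, ?_⟩
    · intro x
      simp [pvBbuild, PySem.Set.empty, pvAdjS]
    · intro c hc0 hcn
      unfold pvBbuild
      rw [List.foldl_nil]
      rw [PySem.List.pyGetD_map_pyRange_of_nonneg _ _ _ _ hc0 hcn]
      exact ⟨List.nodup_nil, fun v => by simp [pvAdjS]⟩
  | append_singleton rs p ih =>
    obtain ⟨a, b⟩ := p
    have hpre' : ∀ q ∈ rs, (0 ≤ q.1 ∧ q.1 < n) ∧ (0 ≤ q.2 ∧ q.2 < n) :=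
      fun q hq => hpre q (List.mem_append_left _ hq)
    obtain ⟨ihlen, ihseen, ihadj⟩ := ih hpre'
    have hp := hpre (a, b) (List.mem_append_right _ (List.mem_singleton.mpr rfl))
    have ha0 : (0 : Int) ≤ a := hp.1.1
    have han : a < n := hp.1.2
    have hb0 : (0 : Int) ≤ b := hp.2.1
    have hbn : b < n := hp.2.2
    have hstep : pvBbuild n (rs ++ [(a, b)]) =
        (if PySem.Set.contains (pvBbuild n rs).2 (a, b) then pvBbuild n rs
         else (if b ≠ a then pvBadd (pvBadd (pvBbuild n rs).1 a b) b a
               else pvBadd (pvBbuild n rs).1 a b,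
               PySem.Set.add (PySem.Set.add (pvBbuild n rs).2 (a, b)) (b, a))) := by
      unfold pvBbuild
      rw [List.foldl_append, List.foldl_cons, List.foldl_nil]
    have hlenInt : ((pvBbuild n rs).1.length : Int) = (n.toNat : Int) := by rw [ihlen]
    have haL : a < ((pvBbuild n rs).1.length : Int) := by omega
    have hbL : b < ((pvBbuild n rs).1.length : Int) := by omega
    have hadjrw : ∀ c v, pvAdjS (rs ++ [(a, b)]) c v = true ↔
        (pvAdjS rs c v = true ∨ (a = c ∧ b = v) ∨ (a = v ∧ b = c)) := by
      intro c v
      rw [pvAdjS_append_single]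
      simp [Bool.or_eq_true, Bool.and_eq_true, beq_iff_eq]
    by_cases hseen : PySem.Set.contains (pvBbuild n rs).2 (a, b) = true
    · have hab : pvAdjS rs a b = true := by
        have := (ihseen (a, b)).mp ((PySem.Set.contains_iff _ _).mp hseen)
        exact this
      rw [hstep, if_pos hseen]
      refine ⟨ihlen, ?_, ?_⟩
      · intro x
        rw [ihseen x, hadjrw x.1 x.2]
        constructor
        · exact fun h => Or.inl h
        · rintro (h | ⟨h1, h2⟩ | ⟨h1, h2⟩)
          · exact h
          · rw [← h1, ← h2]; exact hab
          · rw [← h1, ← h2]; rw [pvAdjS_symm]; exact hab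
      · intro c hc0 hcn
        refine ⟨(ihadj c hc0 hcn).1, ?_⟩
        intro v
        rw [(ihadj c hc0 hcn).2 v, hadjrw c v]
        constructor
        · exact fun h => Or.inl h
        · rintro (h | ⟨h1, h2⟩ | ⟨h1, h2⟩)
          · exact h
          · rw [← h1, ← h2]; exact hab
          · rw [← h1, ← h2]; rw [pvAdjS_symm]; exact hab
    · have hnab : ¬ pvAdjS rs a b = true := by
        intro h
        exact hseen ((PySem.Set.contains_iff _ _).mpr ((ihseen (a, b)).mpr h))
      have hnba : ¬ pvAdjS rs b a = true := by rw [pvAdjS_symm]; exact hnab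
      rw [hstep, if_neg hseen]
      by_cases hba : b = a
      · subst hba
        rw [if_neg (by simp)]
        refine ⟨by rw [pvBadd_len, ihlen], ?_, ?_⟩
        · intro x
          simp only [PySem.Set.mem_add]
          rw [ihseen x, hadjrw x.1 x.2]
          constructor
          · rintro ((h | rfl) | rfl)
            · exact Or.inl h
            · exact Or.inr (Or.inl ⟨rfl, rfl⟩)
            · exact Or.inr (Or.inl ⟨rfl, rfl⟩)
          · rintro (h | ⟨h1, h2⟩ | ⟨h1, h2⟩)
            · exact Or.inl (Or.inl h)
            · exact Or.inl (Or.inr (by rw [Prod.ext_iff]; exact ⟨h1.symm, h2.symm⟩))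
            · exact Or.inl (Or.inr (by rw [Prod.ext_iff]; exact ⟨h2.symm, h1.symm⟩))
        · intro c hc0 hcn
          rw [pvBadd_get _ _ _ _ ha0 haL hc0 (by omega)]
          by_cases hca : c = b
          · rw [if_pos hca]
            refine ⟨?_, ?_⟩
            · apply List.Nodup.append (ihadj b ha0 han).1 (List.nodup_singleton b)
              intro z hz1 hz2
              rw [List.mem_singleton] at hz2
              rw [hz2] at hz1
              exact hnab ((ihadj b ha0 han).2 b |>.mp hz1)
            · intro v
              rw [List.mem_append, List.mem_singleton, (ihadj b ha0 han).2 v, hadjrw c v]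
              constructor
              · rintro (h | rfl)
                · exact Or.inl (by rw [hca]; exact h)
                · exact Or.inr (Or.inl ⟨hca.symm, rfl⟩)
              · rintro (h | ⟨h1, h2⟩ | ⟨h1, h2⟩)
                · exact Or.inl (by rw [← hca]; exact h)
                · exact Or.inr h2.symm
                · exact Or.inr h1.symm
          · rw [if_neg hca]
            refine ⟨(ihadj c hc0 hcn).1, ?_⟩
            intro v
            rw [(ihadj c hc0 hcn).2 v, hadjrw c v]
            constructor
            · exact fun h => Or.inl h
            · rintro (h | ⟨h1, h2⟩ | ⟨h1, h2⟩)
              · exact h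
              · exact absurd h1.symm hca
              · exact absurd h2.symm hca
      · rw [if_pos hba]
        have hlen1 : (pvBadd (pvBbuild n rs).1 a b).length = (pvBbuild n rs).1.length :=
          pvBadd_len _ _ _
        refine ⟨by rw [pvBadd_len, pvBadd_len, ihlen], ?_, ?_⟩
        · intro x
          simp only [PySem.Set.mem_add]
          rw [ihseen x, hadjrw x.1 x.2]
          constructor
          · rintro ((h | rfl) | rfl)
            · exact Or.inl h
            · exact Or.inr (Or.inl ⟨rfl, rfl⟩)
            · exact Or.inr (Or.inr ⟨rfl, rfl⟩)
          · rintro (h | ⟨h1, h2⟩ | ⟨h1, h2⟩)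
            · exact Or.inl (Or.inl h)
            · exact Or.inl (Or.inr (by rw [Prod.ext_iff]; exact ⟨h1.symm, h2.symm⟩))
            · exact Or.inr (by rw [Prod.ext_iff]; exact ⟨h2.symm, h1.symm⟩)
        · intro c hc0 hcn
          rw [pvBadd_get _ _ _ _ hb0 (by rw [hlen1]; omega) hc0 (by rw [hlen1]; omega)]
          rw [pvBadd_get _ _ _ _ ha0 haL hb0 hbL, pvBadd_get _ _ _ _ ha0 haL hc0 (by omega)]
          rw [if_neg hba]
          by_cases hcb : c = b
          · rw [if_pos hcb]
            refine ⟨?_, ?_⟩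
            · apply List.Nodup.append (ihadj b hb0 hbn).1 (List.nodup_singleton a)
              intro z hz1 hz2
              rw [List.mem_singleton] at hz2
              rw [hz2] at hz1
              exact hnba ((ihadj b hb0 hbn).2 a |>.mp hz1)
            · intro v
              rw [List.mem_append, List.mem_singleton, (ihadj b hb0 hbn).2 v, hadjrw c v]
              constructor
              · rintro (h | rfl)
                · exact Or.inl (by rw [hcb]; exact h)
                · exact Or.inr (Or.inr ⟨rfl, hcb.symm⟩)
              · rintro (h | ⟨h1, h2⟩ | ⟨h1, h2⟩)
                · exact Or.inl (by rw [← hcb]; exact h)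
                · exact absurd (h1.trans hcb).symm hba
                · exact Or.inr h1.symm
          · rw [if_neg hcb]
            by_cases hca : c = a
            · rw [if_pos hca]
              refine ⟨?_, ?_⟩
              · apply List.Nodup.append (ihadj a ha0 han).1 (List.nodup_singleton b)
                intro z hz1 hz2
                rw [List.mem_singleton] at hz2
                rw [hz2] at hz1
                exact hnab ((ihadj a ha0 han).2 b |>.mp hz1)
              · intro v
                rw [List.mem_append, List.mem_singleton, (ihadj a ha0 han).2 v, hadjrw c v]
                constructor
                · rintro (h | rfl)
                  · exact Or.inl (by rw [hca]; exact h)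
                  · exact Or.inr (Or.inl ⟨hca.symm, rfl⟩)
                · rintro (h | ⟨h1, h2⟩ | ⟨h1, h2⟩)
                  · exact Or.inl (by rw [← hca]; exact h)
                  · exact Or.inr h2.symm
                  · exact absurd h2.symm hcb
            · rw [if_neg hca]
              refine ⟨(ihadj c hc0 hcn).1, ?_⟩
              intro v
              rw [(ihadj c hc0 hcn).2 v, hadjrw c v]
              constructor
              · exact fun h => Or.inl h
              · rintro (h | ⟨h1, h2⟩ | ⟨h1, h2⟩)
                · exact h
                · exact absurd h1.symm hca
                · exact absurd h2.symm hcb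

-- ---- B-side inner fold ----
theorem pvSetGet (xs : List Int) (x c w : Int) (hx0 : 0 ≤ x) (hxl : x < (xs.length : Int))
    (hc0 : 0 ≤ c) (hcl : c < (xs.length : Int)) :
    PySem.List.pyGetD (PySem.List.pySetD xs x w) c 0 =
      if c = x then w else PySem.List.pyGetD xs c 0 := by
  rw [PySem.List.pySetD_of_nonneg _ _ hx0]
  have hcnat : c = ((c.toNat : Nat) : Int) := (Int.toNat_of_nonneg hc0).symm
  rw [hcnat, PySem.List.pyGetD_natCast, PySem.List.pyGetD_natCast]
  rw [List.getD_eq_getElem _ _ (by rw [List.length_set]; omega),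
    List.getD_eq_getElem _ _ (by omega)]
  rw [List.getElem_set]
  split_ifs with h1 h2 h2
  · rfl
  · omega
  · omega
  · rfl

def pvJB (n : Int) (roads : List (Int × Int)) (d : Nat) (deg0 ans0 : List Int) (V : List Int)
    (st : List Int × List Int × List Int) : Prop :=
  st.1.length = n.toNat ∧ st.2.1.length = n.toNat ∧
  (∀ k : Nat, k < n.toNat →
    ((¬ pvAlive n roads d (k : Int) = true →
        PySem.List.pyGetD st.2.1 (k : Int) 0 = PySem.List.pyGetD ans0 (k : Int) 0 ∧
        (k : Int) ∉ st.2.2) ∧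
     (pvAlive n roads d (k : Int) = true →
        ((2 ≤ (pvDeg n roads (d - 1) (k : Int) : Int) - (V.count (k : Int) : Int) →
            PySem.List.pyGetD st.2.1 (k : Int) 0 = -1 ∧
            PySem.List.pyGetD st.1 (k : Int) 0 =
              (pvDeg n roads (d - 1) (k : Int) : Int) - (V.count (k : Int) : Int) ∧
            (k : Int) ∉ st.2.2) ∧
         ((pvDeg n roads (d - 1) (k : Int) : Int) - (V.count (k : Int) : Int) ≤ 1 →
            PySem.List.pyGetD st.2.1 (k : Int) 0 = (d : Int) + 1 ∧ (k : Int) ∈ st.2.2))))) ∧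
  st.2.2.Nodup ∧
  (∀ x ∈ st.2.2, pvAlive n roads d x = true)

theorem pvJBstep (n : Int) (roads : List (Int × Int)) (d : Nat)
    (deg0 ans0 : List Int) (hans0 : ans0 = (PySem.List.pyRange 0 n 1).map (fun c => pvAns n roads d c))
    (V₁ : List Int) (st : List Int × List Int × List Int)
    (hJB : pvJB n roads d deg0 ans0 V₁ st) (v : Int) (hv0 : 0 ≤ v) (hvn : v < n) :
    pvJB n roads d deg0 ans0 (V₁ ++ [v]) (pvBstep ((d : Int) + 1) st v) := by
  obtain ⟨hdl, hal, hk, hnd, hmem⟩ := hJB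
  have hkv : v.toNat < n.toNat := by omega
  have hvcast : ((v.toNat : Nat) : Int) = v := Int.toNat_of_nonneg hv0
  have hcount : ∀ k : Nat, ((V₁ ++ [v]).count (k : Int) : Int)
      = (V₁.count (k : Int) : Int) + (if (k : Int) = v then 1 else 0) := by
    intro k
    rw [List.count_append]
    by_cases h : (k : Int) = v
    · simp [h]
    · simp [List.count_singleton, h]
      omega
  have hvIn : v < (st.2.1.length : Int) := by omega
  have hvInD : v < (st.1.length : Int) := by omega
  -- the value of ans at v decides the branch
  rcases (hk v.toNat hkv) with ⟨hdead, halive⟩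
  by_cases hva : pvAlive n roads d v = true
  · -- alive
    rcases halive (by rwa [hvcast]) with ⟨h2le, h1le⟩
    by_cases hr : 2 ≤ (pvDeg n roads (d - 1) v : Int) - (V₁.count v : Int)
    · -- still has degree ≥ 2 before this decrement: ans[v] = -1, guard fires
      have hbig := h2le (by rwa [hvcast])
      rw [hvcast] at hbig
      obtain ⟨hansv, hdegv, hnin⟩ := hbig
      have hguard : PySem.List.pyGetD st.2.1 v 0 = -1 := hansv
      unfold pvBstep
      rw [if_pos hguard]
      rw [pvSetGet st.1 v v _ hv0 hvInD hv0 hvInD, if_pos rfl, hdegv]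
      by_cases hle : (pvDeg n roads (d - 1) v : Int) - (V₁.count v : Int) - 1 ≤ 1
      · rw [if_pos hle]
        refine ⟨by rw [PySem.List.length_pySetD]; exact hdl,
          by rw [PySem.List.length_pySetD]; exact hal, ?_, ?_, ?_⟩
        · intro k hkn
          rcases hk k hkn with ⟨hdead', halive'⟩
          by_cases hkvv : (k : Int) = v
          · constructor
            · intro hcon; rw [hkvv] at hcon; exact absurd hva hcon
            · intro _
              rw [hcount k, if_pos hkvv]
              constructor
              · intro hc2
                rw [hkvv] at hc2
                omega
              · intro _
                rw [hkvv]
                rw [pvSetGet st.2.1 v v _ hv0 hvIn hv0 hvIn, if_pos rfl]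
                exact ⟨rfl, List.mem_append_right _ (List.mem_singleton.mpr rfl)⟩
          · have hkIn : (k : Int) < (st.2.1.length : Int) := by omega
            have hkInD : (k : Int) < (st.1.length : Int) := by omega
            have hk0 : (0 : Int) ≤ (k : Int) := by omega
            constructor
            · intro hcon
              obtain ⟨ha1, ha2⟩ := hdead' hcon
              refine ⟨?_, ?_⟩
              · rw [pvSetGet st.2.1 v (k : Int) _ hv0 hvIn hk0 hkIn, if_neg hkvv]
                exact ha1
              · intro hin
                rcases List.mem_append.mp hin with hin | hin
                · exact ha2 hin
                · exact hkvv (List.mem_singleton.mp hin)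
            · intro hally
              rcases halive' hally with ⟨hc2, hc1⟩
              rw [hcount k, if_neg hkvv]
              constructor
              · intro hge
                obtain ⟨hb1, hb2, hb3⟩ := hc2 (by omega)
                refine ⟨?_, ?_, ?_⟩
                · rw [pvSetGet st.2.1 v (k : Int) _ hv0 hvIn hk0 hkIn, if_neg hkvv]
                  exact hb1
                · rw [pvSetGet st.1 v (k : Int) _ hv0 hvInD hk0 hkInD, if_neg hkvv]
                  omega
                · intro hin
                  rcases List.mem_append.mp hin with hin | hin
                  · exact hb3 hin
                  · exact hkvv (List.mem_singleton.mp hin)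
              · intro hge
                obtain ⟨hb1, hb2⟩ := hc1 (by omega)
                refine ⟨?_, ?_⟩
                · rw [pvSetGet st.2.1 v (k : Int) _ hv0 hvIn hk0 hkIn, if_neg hkvv]
                  exact hb1
                · exact List.mem_append_left _ hb2
        · rw [List.nodup_append]
          refine ⟨hnd, List.nodup_singleton v, ?_⟩
          intro z hz w hw
          rw [List.mem_singleton] at hw
          subst hw
          intro heq
          subst heq
          exact hnin hz
        · intro x hx
          rcases List.mem_append.mp hx with hx | hx
          · exact hmem x hx
          · rw [List.mem_singleton.mp hx]; exact hva
      · rw [if_neg hle]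
        refine ⟨by rw [PySem.List.length_pySetD]; exact hdl, hal, ?_, hnd, hmem⟩
        intro k hkn
        rcases hk k hkn with ⟨hdead', halive'⟩
        by_cases hkvv : (k : Int) = v
        · constructor
          · intro hcon; rw [hkvv] at hcon; exact absurd hva hcon
          · intro _
            rw [hcount k, if_pos hkvv]
            constructor
            · intro _
              rw [hkvv]
              refine ⟨hansv, ?_, hnin⟩
              rw [pvSetGet st.1 v v _ hv0 hvInD hv0 hvInD, if_pos rfl]
              omega
            · intro hc1
              rw [hkvv] at hc1
              omega
        · have hkInD : (k : Int) < (st.1.length : Int) := by omega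
          have hk0 : (0 : Int) ≤ (k : Int) := by omega
          constructor
          · intro hcon
            exact hdead' hcon
          · intro hally
            rcases halive' hally with ⟨hc2, hc1⟩
            rw [hcount k, if_neg hkvv]
            constructor
            · intro hge
              obtain ⟨hb1, hb2, hb3⟩ := hc2 (by omega)
              refine ⟨hb1, ?_, hb3⟩
              rw [pvSetGet st.1 v (k : Int) _ hv0 hvInD hk0 hkInD, if_neg hkvv]
              omega
            · intro hge
              exact hc1 (by omega)
    · -- already assigned this level: ans[v] = d+1 ≠ -1, guard skips
      have hsmall := h1le (by rw [hvcast]; omega)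
      rw [hvcast] at hsmall
      obtain ⟨hansv, hinv⟩ := hsmall
      have hguard : ¬ PySem.List.pyGetD st.2.1 v 0 = -1 := by
        rw [hansv]; omega
      unfold pvBstep
      rw [if_neg hguard]
      refine ⟨hdl, hal, ?_, hnd, hmem⟩
      intro k hkn
      rcases hk k hkn with ⟨hdead', halive'⟩
      by_cases hkvv : (k : Int) = v
      · constructor
        · intro hcon; rw [hkvv] at hcon; exact absurd hva hcon
        · intro _
          rw [hcount k, if_pos hkvv]
          constructor
          · intro hge
            rw [hkvv] at hge
            omega
          · intro _
            rw [hkvv]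
            exact ⟨hansv, hinv⟩
      · constructor
        · exact hdead'
        · intro hally
          rcases halive' hally with ⟨hc2, hc1⟩
          rw [hcount k, if_neg hkvv]
          constructor
          · intro hge; exact hc2 (by omega)
          · intro hge; exact hc1 (by omega)
  · -- dead: ans[v] = pvAns d v ≠ -1, guard skips
    obtain ⟨hansv, hninv⟩ := hdead (by rwa [hvcast])
    rw [hvcast] at hansv hninv
    have hval : PySem.List.pyGetD ans0 v 0 = pvAns n roads d v := by
      rw [hans0, PySem.List.pyGetD_map_pyRange_of_nonneg _ _ _ _ hv0 hvn]
    have hguard : ¬ PySem.List.pyGetD st.2.1 v 0 = -1 := by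
      rw [hansv, hval]
      exact pvAns_ne_neg_one_of_dead n roads d v hva
    unfold pvBstep
    rw [if_neg hguard]
    refine ⟨hdl, hal, ?_, hnd, hmem⟩
    intro k hkn
    rcases hk k hkn with ⟨hdead', halive'⟩
    by_cases hkvv : (k : Int) = v
    · constructor
      · intro _
        rw [hkvv]
        exact ⟨hansv, hninv⟩
      · intro hcon; rw [hkvv] at hcon; exact absurd hcon hva
    · constructor
      · exact hdead'
      · intro hally
        rcases halive' hally with ⟨hc2, hc1⟩
        rw [hcount k, if_neg hkvv]
        constructor
        · intro hge; exact hc2 (by omega)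
        · intro hge; exact hc1 (by omega)

-- ---- B-side counting and round ----
theorem pvCountFlatMap (l : List Int) (f : Int → List Int) (x : Int) :
    (l.flatMap f).count x = (l.map (fun u => (f u).count x)).sum := by
  induction l with
  | nil => rfl
  | cons a l ih => simp [List.flatMap_cons, List.count_append, ih]

theorem pvCountNodup {l : List Int} (h : l.Nodup) (x : Int) :
    l.count x = if x ∈ l then 1 else 0 := by
  by_cases hx : x ∈ l
  · rw [if_pos hx]
    exact List.count_eq_one_of_mem h hx
  · rw [if_neg hx]
    exact List.count_eq_zero_of_not_mem hx

theorem pvSumIte (l : List Int) (p : Int → Prop) [DecidablePred p] :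
    (l.map (fun u => if p u then (1 : Nat) else 0)).sum = l.countP (fun u => decide (p u)) := by
  induction l with
  | nil => rfl
  | cons a l ih =>
    rw [List.map_cons, List.sum_cons, List.countP_cons, ih]
    by_cases h : p a <;> simp [h] <;> omega

theorem pvJBfold (n : Int) (roads : List (Int × Int)) (d : Nat) (deg0 ans0 : List Int)
    (hans0 : ans0 = (PySem.List.pyRange 0 n 1).map (fun c => pvAns n roads d c))
    (V : List Int) (hVr : ∀ v ∈ V, 0 ≤ v ∧ v < n) (st0 : List Int × List Int × List Int)
    (h0 : pvJB n roads d deg0 ans0 [] st0) :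
    pvJB n roads d deg0 ans0 V (V.foldl (pvBstep ((d : Int) + 1)) st0) := by
  induction V using List.reverseRecOn with
  | nil => exact h0
  | append_singleton V v ih =>
    rw [List.foldl_append, List.foldl_cons, List.foldl_nil]
    have hv := hVr v (List.mem_append_right _ (List.mem_singleton.mpr rfl))
    exact pvJBstep n roads d deg0 ans0 hans0 V _
      (ih (fun u hu => hVr u (List.mem_append_left _ hu))) v hv.1 hv.2

def pvIB (n : Int) (roads : List (Int × Int)) (d : Nat) (deg ans frontier : List Int) : Prop :=
  1 ≤ d ∧ d ≤ pvStop n roads + 1 ∧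
  deg.length = n.toNat ∧
  (∀ k : Nat, k < n.toNat → pvAlive n roads d (k : Int) = true →
     PySem.List.pyGetD deg (k : Int) 0 = (pvDeg n roads (d - 1) (k : Int) : Int)) ∧
  ans = (PySem.List.pyRange 0 n 1).map (fun c => pvAns n roads d c) ∧
  frontier.Nodup ∧ (∀ c, c ∈ frontier ↔ c ∈ pvR n roads (d - 1))

theorem pvBround (n : Int) (roads : List (Int × Int)) (hpre : Pre_citiesConquering n roads)
    (d : Nat) (deg ans frontier : List Int) (hIB : pvIB n roads d deg ans frontier)
    (hne : ¬ frontier = []) :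
    pvIB n roads (d + 1)
      (frontier.foldl (fun st c => (PySem.List.pyGetD (pvBbuild n roads).1 c []).foldl
        (pvBstep ((d : Int) + 1)) st) (deg, ans, [])).1
      (frontier.foldl (fun st c => (PySem.List.pyGetD (pvBbuild n roads).1 c []).foldl
        (pvBstep ((d : Int) + 1)) st) (deg, ans, [])).2.1
      (frontier.foldl (fun st c => (PySem.List.pyGetD (pvBbuild n roads).1 c []).foldl
        (pvBstep ((d : Int) + 1)) st) (deg, ans, [])).2.2 := by
  obtain ⟨hd1, hdle, hdl, hdeg, hans, hfnd, hfmem⟩ := hIB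
  obtain ⟨hblen, -, hbadj⟩ := pvBbuildAux n roads hpre
  have hdstop : d ≤ pvStop n roads := by
    rcases Nat.lt_or_ge d (pvStop n roads + 1) with h | h
    · omega
    · exfalso
      obtain ⟨c, hc⟩ := List.exists_mem_of_ne_nil frontier hne
      have hcR := (hfmem c).mp hc
      have hd' : d - 1 = pvStop n roads := by omega
      rw [hd', pvStop_spec n roads] at hcR
      cases hcR
  have hfR : ∀ u ∈ frontier, 0 ≤ u ∧ u < n := by
    intro u hu
    have := (mem_pvR n roads (d - 1) u).mp ((hfmem u).mp hu)
    exact pvAlive_range n roads (d - 1) u this.1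
  have hflat : frontier.foldl (fun st c => (PySem.List.pyGetD (pvBbuild n roads).1 c []).foldl
      (pvBstep ((d : Int) + 1)) st) (deg, ans, []) =
      (frontier.flatMap (fun c => PySem.List.pyGetD (pvBbuild n roads).1 c [])).foldl
        (pvBstep ((d : Int) + 1)) (deg, ans, []) :=
    (pvFoldlFlatMap frontier _ _ _).symm
  have hVr : ∀ v ∈ frontier.flatMap (fun c => PySem.List.pyGetD (pvBbuild n roads).1 c []),
      0 ≤ v ∧ v < n := by
    intro v hv
    rw [List.mem_flatMap] at hv
    obtain ⟨u, hu, hv2⟩ := hv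
    obtain ⟨hu0, hun⟩ := hfR u hu
    have hadj := ((hbadj u hu0 hun).2 v).mp hv2
    exact (pvAdjS_in_range n roads hpre u v hadj).2
  have halive2 : ∀ k : Nat, k < n.toNat → pvAlive n roads d (k : Int) = true →
      2 ≤ pvDeg n roads (d - 1) (k : Int) := by
    intro k hkn hal
    have hd' : d - 1 + 1 = d := by omega
    rw [← hd', pvAlive_succ] at hal
    obtain ⟨-, h2⟩ := Bool.and_eq_true_iff.mp hal
    exact of_decide_eq_true h2
  have h0 : pvJB n roads d deg ans [] (deg, ans, []) := by
    refine ⟨hdl, by rw [hans, List.length_map, PySem.List.length_pyRange_one]; omega, ?_,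
      List.nodup_nil, by simp⟩
    intro k hkn
    constructor
    · intro _; exact ⟨rfl, by simp⟩
    · intro hal
      have h2 := halive2 k hkn hal
      constructor
      · intro _
        refine ⟨?_, ?_, by simp⟩
        · rw [hans, PySem.List.pyGetD_map_pyRange_of_nonneg _ _ _ _ (by omega) (by omega)]
          exact pvAns_neg_one_of_alive n roads d (k : Int) hal
        · rw [hdeg k hkn hal]
          simp
      · intro hc1
        exfalso
        simp only [List.count_nil] at hc1
        omega
  have hJB := pvJBfold n roads d deg ans hans
    (frontier.flatMap (fun c => PySem.List.pyGetD (pvBbuild n roads).1 c [])) hVr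
    (deg, ans, []) h0
  rw [← hflat] at hJB
  obtain ⟨hgl, hga, hclause, hgnd, hgal⟩ := hJB
  have hcnt : ∀ k : Nat, k < n.toNat → pvAlive n roads d (k : Int) = true →
      (((frontier.flatMap (fun c => PySem.List.pyGetD (pvBbuild n roads).1 c [])).count
        (k : Int) : Int)) = (pvDeg n roads (d - 1) (k : Int) : Int) -
        (pvDeg n roads d (k : Int) : Int) := by
    intro k hkn _
    rw [pvCountFlatMap]
    have hmc : frontier.map (fun u => (PySem.List.pyGetD (pvBbuild n roads).1 u []).count (k : Int))
        = frontier.map (fun u =>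
            if (k : Int) ∈ PySem.List.pyGetD (pvBbuild n roads).1 u [] then 1 else 0) := by
      apply List.map_congr_left
      intro u hu
      obtain ⟨hu0, hun⟩ := hfR u hu
      exact pvCountNodup (hbadj u hu0 hun).1 (k : Int)
    rw [hmc, pvSumIte]
    have hcc : frontier.countP (fun u =>
          decide ((k : Int) ∈ PySem.List.pyGetD (pvBbuild n roads).1 u []))
        = frontier.countP (fun u => pvAdjS roads (k : Int) u) := by
      apply List.countP_congr
      intro u hu
      obtain ⟨hu0, hun⟩ := hfR u hu
      by_cases h : (k : Int) ∈ PySem.List.pyGetD (pvBbuild n roads).1 u []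
      · have hadj := ((hbadj u hu0 hun).2 (k : Int)).mp h
        rw [pvAdjS_symm] at hadj
        simp [h, hadj]
      · have hnadj : ¬ pvAdjS roads (k : Int) u = true := by
          rw [pvAdjS_symm]
          exact fun hh => h (((hbadj u hu0 hun).2 (k : Int)).mpr hh)
        simp [h, hnadj]
    rw [hcc]
    have hperm : frontier.countP (fun u => pvAdjS roads (k : Int) u)
        = (pvR n roads (d - 1)).countP (fun u => pvAdjS roads (k : Int) u) :=
      List.Perm.countP_eq _
        ((List.perm_ext_iff_of_nodup hfnd (nodup_pvR n roads (d - 1))).mpr (fun x => hfmem x))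
    rw [hperm]
    have hsplit := pvDeg_split n roads (d - 1) (k : Int)
    rw [show d - 1 + 1 = d by omega] at hsplit
    omega
  refine ⟨by omega, by omega, hgl, ?_, ?_, hgnd, ?_⟩
  · intro k hkn hal1
    have hal0 : pvAlive n roads d (k : Int) = true := pvAlive_mono n roads d (k : Int) hal1
    have h2d : 2 ≤ pvDeg n roads d (k : Int) := by
      rw [pvAlive_succ] at hal1
      obtain ⟨-, h2⟩ := Bool.and_eq_true_iff.mp hal1
      exact of_decide_eq_true h2
    obtain ⟨-, halive'⟩ := hclause k hkn
    obtain ⟨hc2, -⟩ := halive' hal0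
    have hcc := hcnt k hkn hal0
    obtain ⟨-, hdv, -⟩ := hc2 (by omega)
    rw [hdv]
    rw [show d + 1 - 1 = d by omega]
    omega
  · apply List.ext_getElem
    · rw [hga, List.length_map, PySem.List.length_pyRange_one]; omega
    intro k hk1 hk2
    have hkn : k < n.toNat := by rw [hga] at hk1; exact hk1
    have hLHS : (frontier.foldl (fun st c => (PySem.List.pyGetD (pvBbuild n roads).1 c []).foldl
        (pvBstep ((d : Int) + 1)) st) (deg, ans, [])).2.1[k] =
        PySem.List.pyGetD (frontier.foldl (fun st c =>
          (PySem.List.pyGetD (pvBbuild n roads).1 c []).foldl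
          (pvBstep ((d : Int) + 1)) st) (deg, ans, [])).2.1 (k : Int) 0 := by
      rw [PySem.List.pyGetD_natCast, List.getD_eq_getElem _ _ hk1]
    rw [hLHS, List.getElem_map, PySem.List.getElem_pyRange_one, zero_add]
    obtain ⟨hdead', halive'⟩ := hclause k hkn
    by_cases hal : pvAlive n roads d (k : Int) = true
    · obtain ⟨hc2, hc1⟩ := halive' hal
      have hcc := hcnt k hkn hal
      by_cases hge : 2 ≤ (pvDeg n roads (d - 1) (k : Int) : Int) -
          ((frontier.flatMap (fun c => PySem.List.pyGetD (pvBbuild n roads).1 c [])).count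
            (k : Int) : Int)
      · have halS : pvAlive n roads (d + 1) (k : Int) = true := by
          rw [pvAlive_succ, hal, Bool.true_and]
          exact decide_eq_true (by omega)
        rw [(hc2 hge).1]
        exact (pvAns_neg_one_of_alive n roads (d + 1) _ halS).symm
      · have hle : (pvDeg n roads (d - 1) (k : Int) : Int) -
            ((frontier.flatMap (fun c => PySem.List.pyGetD (pvBbuild n roads).1 c [])).count
              (k : Int) : Int) ≤ 1 := by omega
        rw [(hc1 hle).1]
        have hnalS : ¬ pvAlive n roads (d + 1) (k : Int) = true := by
          intro hcon
          rw [pvAlive_succ, hal, Bool.true_and] at hcon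
          have := of_decide_eq_true hcon
          omega
        rw [pvAns_succ, if_pos ⟨hal, hnalS⟩]
        push_cast
        ring
    · rw [(hdead' hal).1]
      rw [hans, PySem.List.pyGetD_map_pyRange_of_nonneg _ _ _ _ (by omega) (by omega)]
      rw [pvAns_succ, if_neg (fun hcon => hal hcon.1)]
  · intro c
    rw [show d + 1 - 1 = d by omega]
    constructor
    · intro hc
      have halc := hgal c hc
      obtain ⟨hc0, hcn⟩ := pvAlive_range n roads d c halc
      have hkc : ((c.toNat : Nat) : Int) = c := Int.toNat_of_nonneg hc0
      obtain ⟨-, halive'⟩ := hclause c.toNat (by omega)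
      obtain ⟨hc2, hc1⟩ := halive' (by rwa [hkc])
      have hcc := hcnt c.toNat (by omega) (by rwa [hkc])
      rw [hkc] at hc2 hc1 hcc
      by_cases hge : 2 ≤ (pvDeg n roads (d - 1) c : Int) -
          ((frontier.flatMap (fun c => PySem.List.pyGetD (pvBbuild n roads).1 c [])).count c : Int)
      · exact absurd hc (hc2 hge).2.2
      · rw [mem_pvR]
        refine ⟨halc, ?_⟩
        intro hcon
        rw [pvAlive_succ, halc, Bool.true_and] at hcon
        have := of_decide_eq_true hcon
        omega
    · intro hR
      obtain ⟨hal, hnal⟩ := (mem_pvR n roads d c).mp hR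
      obtain ⟨hc0, hcn⟩ := pvAlive_range n roads d c hal
      have hkc : ((c.toNat : Nat) : Int) = c := Int.toNat_of_nonneg hc0
      obtain ⟨-, halive'⟩ := hclause c.toNat (by omega)
      obtain ⟨-, hc1⟩ := halive' (by rwa [hkc])
      have hcc := hcnt c.toNat (by omega) (by rwa [hkc])
      rw [hkc] at hc1 hcc
      have hDd : ¬ 2 ≤ pvDeg n roads d c := by
        intro hcon
        apply hnal
        rw [pvAlive_succ, hal, Bool.true_and]
        exact decide_eq_true hcon
      exact (hc1 (by omega)).2

-- ---- B init and main loop ----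
theorem pvBinitIB (n : Int) (roads : List (Int × Int)) (hpre : Pre_citiesConquering n roads) :
    pvIB n roads 1
      ((pvBbuild n roads).1.map (fun l => (l.length : Int)))
      (((PySem.List.pyRange 0 n 1).filter (fun c =>
          PySem.List.pyGetD ((pvBbuild n roads).1.map (fun l => (l.length : Int))) c 0 ≤ 1)).foldl
        (fun a c => PySem.List.pySetD a c 1) (List.replicate n.toNat (-1 : Int)))
      ((PySem.List.pyRange 0 n 1).filter (fun c =>
        PySem.List.pyGetD ((pvBbuild n roads).1.map (fun l => (l.length : Int))) c 0 ≤ 1)) := by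
  obtain ⟨hblen, -, hbadj⟩ := pvBbuildAux n roads hpre
  have hdeg0 : ∀ c : Int, 0 ≤ c → c < n →
      PySem.List.pyGetD ((pvBbuild n roads).1.map (fun l => (l.length : Int))) c 0
        = (pvDeg n roads 0 c : Int) := by
    intro c hc0 hcn
    have h1 : PySem.List.pyGetD ((pvBbuild n roads).1.map (fun l => (l.length : Int))) c 0
        = ((PySem.List.pyGetD (pvBbuild n roads).1 c []).length : Int) := by
      have := PySem.List.pyGetD_map (fun l : List Int => (l.length : Int))
        (pvBbuild n roads).1 c []
      simpa using this
    rw [h1]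
    have h2 : (PySem.List.pyGetD (pvBbuild n roads).1 c []).length = pvDeg n roads 0 c := by
      apply pvDeg_eq_of_set n roads 0 c (hbadj c hc0 hcn).1
      intro v
      rw [(hbadj c hc0 hcn).2 v]
      constructor
      · intro h
        refine ⟨h, ?_⟩
        rw [pvAlive_zero]
        exact decide_eq_true (pvAdjS_in_range n roads hpre c v h).2
      · exact fun h => h.1
    rw [h2]
  have hfmem : ∀ c, (c ∈ (PySem.List.pyRange 0 n 1).filter (fun c =>
      PySem.List.pyGetD ((pvBbuild n roads).1.map (fun l => (l.length : Int))) c 0 ≤ 1)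
        ↔ c ∈ pvR n roads 0) := by
    intro c
    rw [List.mem_filter, PySem.List.mem_pyRange_one]
    constructor
    · rintro ⟨⟨hc0, hcn⟩, hdec⟩
      have := of_decide_eq_true hdec
      rw [hdeg0 c hc0 hcn] at this
      apply (pvRiff n roads 0 c).mp
      refine ⟨by rw [pvAlive_zero]; exact decide_eq_true ⟨hc0, hcn⟩, by omega⟩
    · intro hR
      obtain ⟨hal, hd1⟩ := (pvRiff n roads 0 c).mpr hR
      have hrange := pvAlive_range n roads 0 c hal
      refine ⟨hrange, ?_⟩
      apply decide_eq_true
      rw [hdeg0 c hrange.1 hrange.2]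
      omega
  refine ⟨le_refl 1, by omega, by rw [List.length_map, hblen], ?_, ?_, ?_, ?_⟩
  · intro k hkn hal
    exact hdeg0 (k : Int) (by omega) (by omega)
  · apply List.ext_getElem
    · rw [pvLengthFoldlPySetD, List.length_replicate, List.length_map,
        PySem.List.length_pyRange_one]
      omega
    intro k hk1 hk2
    have hkn : k < n.toNat := by rw [pvLengthFoldlPySetD, List.length_replicate] at hk1; exact hk1
    have hLHS : (((PySem.List.pyRange 0 n 1).filter (fun c =>
        PySem.List.pyGetD ((pvBbuild n roads).1.map (fun l => (l.length : Int))) c 0 ≤ 1)).foldl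
          (fun a c => PySem.List.pySetD a c 1) (List.replicate n.toNat (-1 : Int)))[k]
        = PySem.List.pyGetD (((PySem.List.pyRange 0 n 1).filter (fun c =>
            PySem.List.pyGetD ((pvBbuild n roads).1.map (fun l => (l.length : Int))) c 0 ≤ 1)).foldl
          (fun a c => PySem.List.pySetD a c 1) (List.replicate n.toNat (-1 : Int))) (k : Int) 0 := by
      rw [PySem.List.pyGetD_natCast, List.getD_eq_getElem _ _ hk1]
    rw [hLHS]
    have hWr : ∀ c ∈ (PySem.List.pyRange 0 n 1).filter (fun c =>
        PySem.List.pyGetD ((pvBbuild n roads).1.map (fun l => (l.length : Int))) c 0 ≤ 1),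
        0 ≤ c ∧ c < ((List.replicate n.toNat (-1 : Int)).length : Int) := by
      intro c hc
      have := (mem_pvR n roads 0 c).mp ((hfmem c).mp hc)
      have hr := pvAlive_range n roads 0 c this.1
      rw [List.length_replicate]
      omega
    rw [pvGetDFoldlPySetD _ _ 1 k hWr (by rw [List.length_replicate]; exact hkn)]
    have hrep : PySem.List.pyGetD (List.replicate n.toNat (-1 : Int)) (k : Int) 0 = -1 := by
      rw [PySem.List.pyGetD_natCast, List.getD_eq_getElem _ _ (by rwa [List.length_replicate]),
        List.getElem_replicate]
    rw [hrep, List.getElem_map, PySem.List.getElem_pyRange_one, zero_add]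
    have hans1 : pvAns n roads 1 (k : Int) =
        if pvAlive n roads 0 (k : Int) = true ∧ ¬ pvAlive n roads 1 (k : Int) = true
        then ((0 + 1 : Nat) : Int) else pvAns n roads 0 (k : Int) := pvAns_succ n roads 0 (k : Int)
    have hal0 : pvAlive n roads 0 (k : Int) = true := by
      rw [pvAlive_zero]
      exact decide_eq_true ⟨by omega, by omega⟩
    by_cases hkW : (k : Int) ∈ (PySem.List.pyRange 0 n 1).filter (fun c =>
        PySem.List.pyGetD ((pvBbuild n roads).1.map (fun l => (l.length : Int))) c 0 ≤ 1)
    · rw [if_pos hkW, hans1]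
      have hcond := (mem_pvR n roads 0 (k : Int)).mp ((hfmem (k : Int)).mp hkW)
      rw [if_pos hcond]
      simp
    · rw [if_neg hkW, hans1]
      have hcond : ¬ (pvAlive n roads 0 (k : Int) = true ∧ ¬ pvAlive n roads 1 (k : Int) = true) := by
        intro hcon
        exact hkW ((hfmem (k : Int)).mpr ((mem_pvR n roads 0 (k : Int)).mpr hcon))
      rw [if_neg hcond]
      exact (pvAns_neg_one_of_alive n roads 0 (k : Int) hal0).symm
  · exact (PySem.List.nodup_pyRange_one 0 n).filter _
  · intro c
    exact hfmem c

theorem pvBloopEq (n : Int) (roads : List (Int × Int)) (hpre : Pre_citiesConquering n roads) :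
    ∀ (fuel d : Nat) (deg ans frontier : List Int), pvIB n roads d deg ans frontier →
      pvStop n roads + 1 ≤ d + fuel →
      pvBloop fuel (pvBbuild n roads).1 deg ans frontier (d : Int) =
        (PySem.List.pyRange 0 n 1).map (fun c => pvAns n roads (pvStop n roads + 1) c) := by
  intro fuel
  induction fuel with
  | zero =>
    intro d deg ans frontier hIB hf
    obtain ⟨-, hdle, -, -, hans, -, -⟩ := hIB
    have hd : d = pvStop n roads + 1 := by omega
    show ans = _
    rw [hans, hd]
  | succ fuel ih =>
    intro d deg ans frontier hIB hf
    rw [pvBloop]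
    by_cases hc : frontier = []
    · rw [if_pos hc]
      obtain ⟨hd1, hdle, -, -, hans, -, hfmem⟩ := hIB
      have hRempty : pvR n roads (d - 1) = [] := by
        rw [List.eq_nil_iff_forall_not_mem]
        intro c hcR
        have := (hfmem c).mpr hcR
        rw [hc] at this
        cases this
      have hstople : pvStop n roads ≤ d - 1 := Nat.find_min' _ hRempty
      have hd : d = pvStop n roads + 1 := by omega
      rw [hans, hd]
    · rw [if_neg hc]
      have hstep := pvBround n roads hpre d deg ans frontier hIB hc
      show pvBloop fuel (pvBbuild n roads).1
          (frontier.foldl (fun st c => (PySem.List.pyGetD (pvBbuild n roads).1 c []).foldl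
            (pvBstep ((d : Int) + 1)) st) (deg, ans, [])).1
          (frontier.foldl (fun st c => (PySem.List.pyGetD (pvBbuild n roads).1 c []).foldl
            (pvBstep ((d : Int) + 1)) st) (deg, ans, [])).2.1
          (frontier.foldl (fun st c => (PySem.List.pyGetD (pvBbuild n roads).1 c []).foldl
            (pvBstep ((d : Int) + 1)) st) (deg, ans, [])).2.2
          ((d : Int) + 1) = _
      have hcast : ((d : Int) + 1) = ((d + 1 : Nat) : Int) := by push_cast; ring
      rw [hcast]
      exact ih (d + 1) _ _ _ hstep (by omega)

theorem pvBEq (n : Int) (roads : List (Int × Int)) (hpre : Pre_citiesConquering n roads) :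
    citiesConquering_alt n roads =
      (PySem.List.pyRange 0 n 1).map (fun c => pvAns n roads (pvStop n roads + 1) c) := by
  have hfuel : pvStop n roads + 1 ≤ 1 + (n.toNat + 2) := by
    have := pvStop_le n roads; omega
  have h := pvBloopEq n roads hpre (n.toNat + 2) 1 _ _ _ (pvBinitIB n roads hpre) hfuel
  unfold citiesConquering_alt
  exact h

-- ===== VERDICT (by name: the statement is the Claim_ definition above) =====
theorem citiesConquering_spec : Claim_equal_citiesConquering := by
  unfold Claim_equal_citiesConquering
  intro n roads _ hpre
  unfold Spec_citiesConquering
  rw [pvAEq n roads hpre, pvBEq n roads hpre]
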